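-- pv_equiv track=rewrite | github.com/muvadi-p/EECE5550 | mtmv_greedy_algorithm.py | build_distance_matrix
-- ===== SOURCE A (Python) =====
-- import heapq
--
-- GRID_SIZE = 15
--
-- SHELVES = [
--     (3,2),(3,3),(3,4),(3,5),(7,2),(7,3),(7,4),(7,5),
--     (11,2),(11,3),(11,4),(11,5),(3,9),(3,10),(3,11),(3,12),
--     (7,9),(7,10),(7,11),(7,12),(11,9),(11,10),(11,11),(11,12),
-- ]
--
-- def heuristic(a, b):
--     return abs(a[0] - b[0]) + abs(a[1] - b[1])
--
-- def get_neighbors(node):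
--     dirs = [(0, -1), (0, 1), (-1, 0), (1, 0)]
--     neighbors = []
--     for d in dirs:
--         nx, ny = node[0] + d[0], node[1] + d[1]
--         if 0 <= nx < GRID_SIZE and 0 <= ny < GRID_SIZE:
--             if (nx, ny) not in SHELVES:
--                 neighbors.append((nx, ny))
--     return neighbors
--
-- def a_star(start, goal):
--     if start == goal:
--         return [start]
--     open_set = [(heuristic(start, goal), 0, start)]
--     came_from = {}
--     g_score = {start: 0}
--
--     while open_set:
--         _, g, current = heapq.heappop(open_set)
--         if current == goal:
--             path = []
--             while current in came_from:
--                 path.append(current)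
--                 current = came_from[current]
--             path.append(start)
--             return path[::-1]
--         for neighbor in get_neighbors(current):
--             tent_g = g_score[current] + 1
--             if neighbor not in g_score or tent_g < g_score[neighbor]:
--                 came_from[neighbor] = current
--                 g_score[neighbor] = tent_g
--                 heapq.heappush(open_set, (tent_g + heuristic(neighbor, goal), tent_g, neighbor))
--     return []
--
-- def build_distance_matrix(locations):
--     n = len(locations)
--     matrix = [[float('inf')] * n for _ in range(n)]
--     for i in range(n):
--         matrix[i][i] = 0
--         for j in range(i + 1, n):
--             path = a_star(locations[i], locations[j])
--             dist = len(path) - 1 if path else 9999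
--             matrix[i][j] = dist
--             matrix[j][i] = dist
--     return matrix
-- ===== SOURCE B (Python) =====
-- GRID_SIZE = 15
--
-- SHELVES = [
--     (3,2),(3,3),(3,4),(3,5),(7,2),(7,3),(7,4),(7,5),
--     (11,2),(11,3),(11,4),(11,5),(3,9),(3,10),(3,11),(3,12),
--     (7,9),(7,10),(7,11),(7,12),(11,9),(11,10),(11,11),(11,12),
-- ]
--
-- def get_neighbors(node):
--     dirs = [(0, -1), (0, 1), (-1, 0), (1, 0)]
--     neighbors = []
--     for d in dirs:
--         nx, ny = node[0] + d[0], node[1] + d[1]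
--         if 0 <= nx < GRID_SIZE and 0 <= ny < GRID_SIZE:
--             if (nx, ny) not in SHELVES:
--                 neighbors.append((nx, ny))
--     return neighbors
--
-- def bfs_distances(start):
--     # layered breadth-first search over the free-cell grid: dist maps every
--     # reachable cell to its shortest-path length from start
--     dist = {start: 0}
--     frontier = [start]
--     while frontier:
--         nxt = []
--         for cur in frontier:
--             for nb in get_neighbors(cur):
--                 if nb not in dist:
--                     dist[nb] = dist[cur] + 1
--                     nxt.append(nb)
--         frontier = nxt
--     return dist
--
-- def build_distance_matrix(locations):
--     # one BFS per source instead of one A* search per pair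
--     n = len(locations)
--     matrix = [[0] * n for _ in range(n)]
--     for i in range(n):
--         dist = bfs_distances(locations[i])
--         for j in range(i + 1, n):
--             d = dist.get(locations[j], 9999)
--             matrix[i][j] = d
--             matrix[j][i] = d
--     return matrix
-- ===== Notes on version B (the rewrite author's own statement) =====
-- stated objective: faster
-- what changed: Replaces one A* search per location pair with a single layered breadth-first search per source location over the free-cell grid, filling each matrix row from the BFS distance dictionary.
import Mathlib
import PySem

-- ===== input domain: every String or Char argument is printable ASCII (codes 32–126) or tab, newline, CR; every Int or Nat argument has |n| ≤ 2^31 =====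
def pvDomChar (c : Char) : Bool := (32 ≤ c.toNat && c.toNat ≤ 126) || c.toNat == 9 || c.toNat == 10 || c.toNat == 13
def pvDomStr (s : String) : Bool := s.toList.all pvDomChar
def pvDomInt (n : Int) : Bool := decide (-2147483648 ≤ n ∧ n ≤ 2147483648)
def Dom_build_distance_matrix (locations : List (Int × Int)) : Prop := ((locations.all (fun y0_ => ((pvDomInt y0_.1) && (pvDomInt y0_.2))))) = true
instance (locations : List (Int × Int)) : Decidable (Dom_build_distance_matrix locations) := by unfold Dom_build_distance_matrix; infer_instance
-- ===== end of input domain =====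

-- B replaces A's per-pair A* searches by ONE layered breadth-first search per source
-- location over the free-cell grid (an asymptotically different algorithm), reading
-- each row's distances out of the BFS distance dictionary.
-- ===== PORT A =====
-- module constants and helpers (shared by both Pythons; Source B carries the same helpers)
def pvGridSize : Int := 15

def pvShelves : List (Int × Int) :=
  [(3,2),(3,3),(3,4),(3,5),(7,2),(7,3),(7,4),(7,5),
   (11,2),(11,3),(11,4),(11,5),(3,9),(3,10),(3,11),(3,12),
   (7,9),(7,10),(7,11),(7,12),(11,9),(11,10),(11,11),(11,12)]

def pvHeuristic (a b : Int × Int) : Int := |a.1 - b.1| + |a.2 - b.2|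

def pvGetNeighbors (node : Int × Int) : List (Int × Int) :=
  ([((0:Int), (-1:Int)), (0, 1), (-1, 0), (1, 0)]).foldl (fun neighbors d =>
    let nx := node.1 + d.1
    let ny := node.2 + d.2
    if 0 ≤ nx ∧ nx < pvGridSize ∧ 0 ≤ ny ∧ ny < pvGridSize then
      if (nx, ny) ∉ pvShelves then neighbors ++ [(nx, ny)] else neighbors
    else neighbors) []

-- heapq entries (f, g, node); heappop returns the least tuple in the total
-- lexicographic order on int tuples, and equal tuples are identical values,
-- so "remove the first minimal element" is exact
def pvEntryLt (a b : Int × Int × (Int × Int)) : Bool :=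
  decide (a.1 < b.1 ∨ (a.1 = b.1 ∧ (a.2.1 < b.2.1 ∨ (a.2.1 = b.2.1 ∧
    (a.2.2.1 < b.2.2.1 ∨ (a.2.2.1 = b.2.2.1 ∧ a.2.2.2 < b.2.2.2))))))

def pvHeapPop? (l : List (Int × Int × (Int × Int))) :
    Option ((Int × Int × (Int × Int)) × List (Int × Int × (Int × Int))) :=
  match l with
  | [] => none
  | x :: xs =>
      let m := xs.foldl (fun m e => if pvEntryLt e m then e else m) x
      some (m, l.erase m)

-- path reconstruction: 'while current in came_from'; the chain visits distinct
-- keys of came_from, so its size bounds the iterations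
def pvReconstruct : Nat → PySem.Dict (Int × Int) (Int × Int) → (Int × Int) →
    List (Int × Int) → List (Int × Int)
  | 0, _, _, path => path
  | fuel + 1, cameFrom, current, path =>
      match cameFrom.get? current with
      | some prev => pvReconstruct fuel cameFrom prev (path ++ [current])
      | none => path

-- 'while open_set': fueled loop; pops are bounded by pushes, which are bounded
-- far below this fuel (a potential argument below proves the fuel suffices)
-- the body of A's relaxation loop over the neighbors of `current`
-- (g_score[current] is always present: recorded at every push and for start)
def pvRelax (goal current : Int × Int)
    (st : List (Int × Int × (Int × Int)) ×
          PySem.Dict (Int × Int) (Int × Int) × PySem.Dict (Int × Int) Int)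
    (neighbor : Int × Int) :
    List (Int × Int × (Int × Int)) ×
      PySem.Dict (Int × Int) (Int × Int) × PySem.Dict (Int × Int) Int :=
  let (os, cf, gs) := st
  let tentG := gs.getD current 0 + 1
  if gs.contains neighbor = false ∨ tentG < gs.getD neighbor 0 then
    (os ++ [(tentG + pvHeuristic neighbor goal, tentG, neighbor)],
     cf.insert neighbor current, gs.insert neighbor tentG)
  else (os, cf, gs)

def pvAStarLoop (start goal : Int × Int) :
    Nat → List (Int × Int × (Int × Int)) → PySem.Dict (Int × Int) (Int × Int) →
    PySem.Dict (Int × Int) Int → List (Int × Int)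
  | 0, _, _, _ => []
  | fuel + 1, openSet, cameFrom, gScore =>
      match pvHeapPop? openSet with
      | none => []
      | some ((_, _, current), rest) =>
          if current = goal then
            ((pvReconstruct (cameFrom.items.length + 1) cameFrom current []) ++ [start]).reverse
          else
            let st := (pvGetNeighbors current).foldl (pvRelax goal current)
              (rest, cameFrom, gScore)
            pvAStarLoop start goal fuel st.1 st.2.1 st.2.2

def pvAStar (start goal : Int × Int) : List (Int × Int) :=
  if start = goal then [start]
  else
    pvAStarLoop start goal 1000000 [(pvHeuristic start goal, 0, start)]
      PySem.Dict.empty (PySem.Dict.empty.insert start 0)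

-- matrix[i][j] = v on the nested-list matrix (indices are in-range loop counters)
def pvSet2 (m : List (List Int)) (i j v : Int) : List (List Int) :=
  PySem.List.pySetD m i (PySem.List.pySetD (PySem.List.pyGetD m i []) j v)

-- float('inf') is ported as the Int placeholder 0: for every n each matrix
-- entry is overwritten below before the matrix is returned
def build_distance_matrix (locations : List (Int × Int)) : List (List Int) :=
  let n : Int := PySem.List.len locations
  let matrix := List.replicate n.toNat (List.replicate n.toNat (0 : Int))
  (PySem.List.pyRange 0 n 1).foldl (fun m i =>
    let m := pvSet2 m i i 0
    (PySem.List.pyRange (i + 1) n 1).foldl (fun m j =>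
      let path := pvAStar (PySem.List.pyGetD locations i (0, 0)) (PySem.List.pyGetD locations j (0, 0))
      let dist : Int := if path ≠ [] then (path.length : Int) - 1 else 9999
      pvSet2 (pvSet2 m i j dist) j i dist) m) matrix

-- ===== PORT B =====
-- bfs_distances: layered BFS; the while-loop is fueled (300): the k-th frontier
-- holds exactly the cells at BFS distance k, every distance is at most 225
-- (there are only 225 grid cells), so round 226 has an empty frontier
-- the body of B's per-neighbor step: insert unseen neighbors at dist[cur] + 1
-- (dist[cur] is always present: cur entered a frontier when it was inserted)
def pvBfsVisit (cur : Int × Int) (st : PySem.Dict (Int × Int) Int × List (Int × Int))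
    (nb : Int × Int) : PySem.Dict (Int × Int) Int × List (Int × Int) :=
  if st.1.contains nb then st
  else (st.1.insert nb (st.1.getD cur 0 + 1), st.2 ++ [nb])

def pvBfsProcess (st : PySem.Dict (Int × Int) Int × List (Int × Int)) (cur : Int × Int) :
    PySem.Dict (Int × Int) Int × List (Int × Int) :=
  (pvGetNeighbors cur).foldl (pvBfsVisit cur) st

def pvBfsLoop : Nat → PySem.Dict (Int × Int) Int → List (Int × Int) →
    PySem.Dict (Int × Int) Int
  | 0, dist, _ => dist
  | fuel + 1, dist, frontier =>
      if frontier = [] then dist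
      else
        let st := frontier.foldl pvBfsProcess (dist, [])
        pvBfsLoop fuel st.1 st.2

def pvBfsDistances (start : Int × Int) : PySem.Dict (Int × Int) Int :=
  pvBfsLoop 300 (PySem.Dict.empty.insert start 0) [start]

def build_distance_matrix_alt (locations : List (Int × Int)) : List (List Int) :=
  let n : Int := PySem.List.len locations
  let matrix := List.replicate n.toNat (List.replicate n.toNat (0 : Int))
  (PySem.List.pyRange 0 n 1).foldl (fun m i =>
    let dist := pvBfsDistances (PySem.List.pyGetD locations i (0, 0))
    (PySem.List.pyRange (i + 1) n 1).foldl (fun m j =>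
      let d := dist.getD (PySem.List.pyGetD locations j (0, 0)) 9999
      pvSet2 (pvSet2 m i j d) j i d) m) matrix

-- ===== PRECONDITION & SPEC =====
def Spec_build_distance_matrix (locations : List (Int × Int)) (out : List (List Int)) : Prop := out = build_distance_matrix_alt locations
instance (locations : List (Int × Int)) (out : List (List Int)) : Decidable (Spec_build_distance_matrix locations out) := by unfold Spec_build_distance_matrix; infer_instance

-- ===== CLAIM (what is proved, stated in full; the proofs are below) =====
def Claim_equal_build_distance_matrix : Prop := ∀ (locations : List (Int × Int)), Dom_build_distance_matrix locations → Spec_build_distance_matrix locations (build_distance_matrix locations)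

-- ===== LEMMAS AND PROOFS =====

-- ======================================================================
-- Graph-distance groundwork: the implicit directed graph u → v, v ∈ pvGetNeighbors u
-- ======================================================================

inductive pvReachN : (Int × Int) → (Int × Int) → Nat → Prop
  | refl (s : Int × Int) : pvReachN s s 0
  | step {s u v : Int × Int} {n : Nat} :
      pvReachN s u n → v ∈ pvGetNeighbors u → pvReachN s v (n + 1)

def pvReach (s v : Int × Int) : Prop := ∃ n, pvReachN s v n

noncomputable def pvDist (s v : Int × Int) : Nat := sInf {n | pvReachN s v n}

-- the per-pair distance A derives from an a_star call
def pvD (a b : Int × Int) : Int :=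
  if pvAStar a b ≠ [] then ((pvAStar a b).length : Int) - 1 else 9999

-- the per-pair distance B reads out of its BFS dictionary
def pvDB (a b : Int × Int) : Int := (pvBfsDistances a).getD b 9999

theorem pvDist_le {s v : Int × Int} {n : Nat} (h : pvReachN s v n) : pvDist s v ≤ n :=
  Nat.sInf_le h

theorem pvReachN_dist {s v : Int × Int} (h : pvReach s v) : pvReachN s v (pvDist s v) :=
  Nat.sInf_mem h

theorem pvDist_self (s : Int × Int) : pvDist s s = 0 :=
  Nat.le_zero.mp (pvDist_le (pvReachN.refl s))

theorem pvReachN_zero {s v : Int × Int} (h : pvReachN s v 0) : v = s := by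
  cases h; rfl

theorem pvReachN_succ_iff {s v : Int × Int} {n : Nat} :
    pvReachN s v (n + 1) ↔ ∃ u, pvReachN s u n ∧ v ∈ pvGetNeighbors u := by
  constructor
  · intro h; cases h with | step h e => exact ⟨_, h, e⟩
  · rintro ⟨u, h, e⟩; exact pvReachN.step h e

theorem pvDist_edge_le {s u v : Int × Int} (h : pvReach s u) (e : v ∈ pvGetNeighbors u) :
    pvDist s v ≤ pvDist s u + 1 :=
  pvDist_le (pvReachN.step (pvReachN_dist h) e)

-- predecessor on a shortest path is at distance exactly one less
theorem pvDist_pred {s v : Int × Int} {n : Nat}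
    (hd : pvDist s v = n + 1) (hr : pvReach s v) :
    ∃ u, pvDist s u = n ∧ pvReachN s u n ∧ v ∈ pvGetNeighbors u := by
  have h := pvReachN_dist hr
  rw [hd] at h
  obtain ⟨u, hu, e⟩ := pvReachN_succ_iff.mp h
  have h1 : pvDist s u ≤ n := pvDist_le hu
  have h2 : pvDist s v ≤ pvDist s u + 1 := pvDist_edge_le ⟨_, hu⟩ e
  exact ⟨u, by omega, by have : pvDist s u = n := by omega
                         exact this ▸ hu, e⟩

-- decomposition: every level i ≤ d(s,u) on a shortest path has a witness
theorem pvDist_decomp {s u : Int × Int} (hr : pvReach s u) :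
    ∀ i ≤ pvDist s u, ∃ w, pvDist s w = i ∧ pvReachN s w i ∧ pvReachN w u (pvDist s u - i) := by
  have main : ∀ n u, pvReach s u → pvDist s u = n →
      ∀ i ≤ n, ∃ w, pvDist s w = i ∧ pvReachN s w i ∧ pvReachN w u (n - i) := by
    intro n
    induction n with
    | zero =>
        intro u hu hd i hi
        have hi0 : i = 0 := Nat.le_zero.mp hi
        subst hi0
        have h0 := pvReachN_dist hu
        rw [hd] at h0
        exact ⟨u, hd, h0, pvReachN.refl u⟩
    | succ n ih =>
        intro u hu hd i hi
        rcases Nat.lt_or_ge i (n + 1) with hlt | hge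
        · obtain ⟨u', hd', hr', e⟩ := pvDist_pred hd hu
          obtain ⟨w, hw1, hw2, hw3⟩ := ih u' ⟨_, hr'⟩ hd' i (by omega)
          refine ⟨w, hw1, hw2, ?_⟩
          have : n + 1 - i = (n - i) + 1 := by omega
          rw [this]
          exact pvReachN.step hw3 e
        · have : i = n + 1 := by omega
          subst this
          have h0 := pvReachN_dist hu
          rw [hd] at h0
          exact ⟨u, hd, h0, by simpa using pvReachN.refl u⟩
  exact main (pvDist s u) u hr rfl

-- ===== free cells and the 225-cell bound =====

def pvFree (v : Int × Int) : Prop :=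
  0 ≤ v.1 ∧ v.1 < 15 ∧ 0 ≤ v.2 ∧ v.2 < 15 ∧ v ∉ pvShelves

theorem pvIf_mem {acc : List (Int × Int)} {v c : Int × Int} {P Q : Prop}
    [Decidable P] [Decidable Q] :
    v ∈ (if P then (if Q then acc ++ [c] else acc) else acc) ↔
      v ∈ acc ∨ (P ∧ Q ∧ v = c) := by
  split_ifs <;> simp <;> tauto

theorem pvMem_neighbors {u v : Int × Int} (h : v ∈ pvGetNeighbors u) :
    pvFree v ∧ |u.1 - v.1| + |u.2 - v.2| = 1 := by
  simp only [pvGetNeighbors, pvGridSize, List.foldl_cons, List.foldl_nil] at h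
  simp only [pvIf_mem, List.not_mem_nil, false_or] at h
  unfold pvFree
  rcases h with ((⟨hb, hs, rfl⟩ | ⟨hb, hs, rfl⟩) | ⟨hb, hs, rfl⟩) | ⟨hb, hs, rfl⟩
  · refine ⟨⟨hb.1, hb.2.1, hb.2.2.1, hb.2.2.2, hs⟩, ?_⟩
    show |u.1 - (u.1 + 0)| + |u.2 - (u.2 + -1)| = 1
    rw [show u.1 - (u.1 + 0) = (0:Int) from by ring,
        show u.2 - (u.2 + -1) = (1:Int) from by ring]
    norm_num
  · refine ⟨⟨hb.1, hb.2.1, hb.2.2.1, hb.2.2.2, hs⟩, ?_⟩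
    show |u.1 - (u.1 + 0)| + |u.2 - (u.2 + 1)| = 1
    rw [show u.1 - (u.1 + 0) = (0:Int) from by ring,
        show u.2 - (u.2 + 1) = (-1:Int) from by ring]
    norm_num
  · refine ⟨⟨hb.1, hb.2.1, hb.2.2.1, hb.2.2.2, hs⟩, ?_⟩
    show |u.1 - (u.1 + -1)| + |u.2 - (u.2 + 0)| = 1
    rw [show u.1 - (u.1 + -1) = (1:Int) from by ring,
        show u.2 - (u.2 + 0) = (0:Int) from by ring]
    norm_num
  · refine ⟨⟨hb.1, hb.2.1, hb.2.2.1, hb.2.2.2, hs⟩, ?_⟩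
    show |u.1 - (u.1 + 1)| + |u.2 - (u.2 + 0)| = 1
    rw [show u.1 - (u.1 + 1) = (-1:Int) from by ring,
        show u.2 - (u.2 + 0) = (0:Int) from by ring]
    norm_num

theorem pvDist_le_225 {s u : Int × Int} (h : pvReach s u) : pvDist s u ≤ 225 := by
  by_contra hc
  have hn : 226 ≤ pvDist s u := by omega
  have hdec := pvDist_decomp h
  classical
  let f : Nat → Int × Int := fun i => if hi : i ≤ pvDist s u then (hdec i hi).choose else s
  have hf : ∀ i ≤ pvDist s u, pvDist s (f i) = i ∧ pvReachN s (f i) i := by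
    intro i hi
    simp only [f, dif_pos hi]
    exact ⟨(hdec i hi).choose_spec.1, (hdec i hi).choose_spec.2.1⟩
  have hmem : ∀ i ∈ Finset.range 227, f i ∈
      insert s ((Finset.Icc (0:Int) 14) ×ˢ (Finset.Icc (0:Int) 14)) := by
    intro i hi
    rw [Finset.mem_range] at hi
    have hile : i ≤ pvDist s u := by omega
    obtain ⟨hd, hrN⟩ := hf i hile
    cases i with
    | zero =>
        have : f 0 = s := pvReachN_zero hrN
        rw [this]; exact Finset.mem_insert_self _ _
    | succ j =>
        obtain ⟨u', _, e⟩ := pvReachN_succ_iff.mp hrN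
        obtain ⟨⟨ha, hb, hcc, hdd, _⟩, _⟩ := pvMem_neighbors e
        refine Finset.mem_insert_of_mem ?_
        rw [Finset.mem_product, Finset.mem_Icc, Finset.mem_Icc]
        omega
  have hinj : Set.InjOn f (Finset.range 227 : Finset ℕ) := by
    intro a ha b hb hab
    rw [Finset.coe_range, Set.mem_Iio] at ha hb
    have h1 := (hf a (by omega)).1
    have h2 := (hf b (by omega)).1
    rw [hab] at h1
    omega
  have hcard := Finset.card_le_card_of_injOn f hmem hinj
  rw [Finset.card_range] at hcard
  have hle := Finset.card_insert_le s ((Finset.Icc (0:Int) 14) ×ˢ (Finset.Icc (0:Int) 14))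
  rw [Finset.card_product] at hle
  simp [Int.card_Icc] at hle
  omega

-- ===== heuristic lemmas =====

theorem pvHeuristic_tri (a c b : Int × Int) :
    pvHeuristic a b ≤ pvHeuristic a c + pvHeuristic c b := by
  unfold pvHeuristic
  have h1 := abs_sub_le a.1 c.1 b.1
  have h2 := abs_sub_le a.2 c.2 b.2
  linarith

theorem pvHeuristic_path {w u g : Int × Int} {k : Nat} (h : pvReachN w u k) :
    pvHeuristic w g ≤ (k : Int) + pvHeuristic u g := by
  induction h with
  | refl => simp
  | step h e ih =>
      rename_i u' v' n'
      have h2 : pvHeuristic u' v' = 1 := (pvMem_neighbors e).2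
      have h4 := pvHeuristic_tri u' v' g
      push_cast
      linarith

-- ======================================================================
-- BFS correctness (port B's search)
-- ======================================================================

-- the BFS mid-round state invariant (after any prefix of the round's work)
def pvBCore (s : Int × Int) (k : Nat)
    (st : PySem.Dict (Int × Int) Int × List (Int × Int)) : Prop :=
  (∀ v gv, st.1.get? v = some gv →
      pvReach s v ∧ pvDist s v ≤ k + 1 ∧ gv = (pvDist s v : Int)) ∧
  (∀ v, pvReach s v → pvDist s v ≤ k → st.1.contains v = true) ∧
  (∀ v, v ∈ st.2 ↔ (st.1.contains v = true ∧ pvReach s v ∧ pvDist s v = k + 1))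

theorem pvBfs_visit_fold (s : Int × Int) (k : Nat) (cur : Int × Int)
    (hr : pvReach s cur) (hd : pvDist s cur = k) :
    ∀ L : List (Int × Int), (∀ x ∈ L, x ∈ pvGetNeighbors cur) →
    ∀ st, pvBCore s k st →
      pvBCore s k (L.foldl (pvBfsVisit cur) st) ∧
      (∀ v, st.1.contains v = true → (L.foldl (pvBfsVisit cur) st).1.contains v = true) ∧
      (∀ v ∈ L, (L.foldl (pvBfsVisit cur) st).1.contains v = true) := by
  intro L
  induction L with
  | nil => exact fun _ st h => ⟨h, fun v hv => hv, by simp⟩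
  | cons nb L ih =>
      intro hsub st hcore
      obtain ⟨b1, b2, m4⟩ := hcore
      have hnb : nb ∈ pvGetNeighbors cur := hsub nb (by simp)
      -- one visit step preserves the core and makes nb contained
      have hstep : pvBCore s k (pvBfsVisit cur st nb) ∧
          (∀ v, st.1.contains v = true → (pvBfsVisit cur st nb).1.contains v = true) ∧
          (pvBfsVisit cur st nb).1.contains nb = true := by
        unfold pvBfsVisit
        by_cases hc : st.1.contains nb = true
        · rw [if_pos hc]
          exact ⟨⟨b1, b2, m4⟩, fun v hv => hv, hc⟩
        · rw [if_neg hc]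
          have hccur : st.1.contains cur = true := b2 cur hr (by omega)
          have hgcur : st.1.get? cur = some (pvDist s cur : Int) := by
            rw [PySem.Dict.contains_eq_isSome_get?] at hccur
            obtain ⟨gv, hgv⟩ := Option.isSome_iff_exists.mp hccur
            rw [hgv, (b1 cur gv hgv).2.2]
          have hgetD : st.1.getD cur 0 = (k : Int) := by
            rw [PySem.Dict.getD_eq_get?_getD, hgcur, hd]; rfl
          have hrnb : pvReach s nb := ⟨k + 1, pvReachN.step (hd ▸ pvReachN_dist hr) hnb⟩
          have hdnb_le : pvDist s nb ≤ k + 1 := by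
            have := pvDist_le (pvReachN.step (hd ▸ pvReachN_dist hr) hnb)
            omega
          have hdnb_ge : ¬ pvDist s nb ≤ k := by
            intro hle
            exact hc (b2 nb hrnb hle)
          have hdnb : pvDist s nb = k + 1 := by omega
          refine ⟨⟨?_, ?_, ?_⟩, ?_, ?_⟩
          · intro v gv hg
            rw [PySem.Dict.get?_insert] at hg
            split at hg
            · rename_i hveq
              subst hveq
              refine ⟨hrnb, by omega, ?_⟩
              have : (st.1.getD cur 0 + 1) = ((k + 1 : Nat) : Int) := by
                rw [hgetD]; push_cast; ring
              rw [← Option.some.inj hg, this, hdnb]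
            · exact b1 v gv hg
          · intro v hv hle
            rw [PySem.Dict.contains_insert]
            rcases Bool.or_eq_true _ _ |>.mpr (Or.inr (b2 v hv hle)) with h
            exact h
          · intro v
            simp only [List.mem_append, List.mem_singleton]
            rw [PySem.Dict.contains_insert]
            constructor
            · rintro (hv | rfl)
              · obtain ⟨hcv, hrv, hdv⟩ := (m4 v).mp hv
                exact ⟨by simp [hcv], hrv, hdv⟩
              · exact ⟨by simp, hrnb, hdnb⟩
            · rintro ⟨hcv, hrv, hdv⟩
              rcases Bool.or_eq_true _ _ |>.mp hcv with hbeq | hold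
              · right; exact eq_of_beq hbeq
              · left; exact (m4 v).mpr ⟨hold, hrv, hdv⟩
          · intro v hv
            rw [PySem.Dict.contains_insert, hv, Bool.or_true]
          · rw [PySem.Dict.contains_insert_self]
      obtain ⟨hcore', hmono', hnb'⟩ := hstep
      obtain ⟨hcoreF, hmonoF, hallF⟩ := ih (fun x hx => hsub x (by simp [hx])) _ hcore'
      rw [List.foldl_cons]
      refine ⟨hcoreF, fun v hv => hmonoF v (hmono' v hv), ?_⟩
      intro v hv
      rcases List.mem_cons.mp hv with rfl | hv
      · exact hmonoF v hnb'
      · exact hallF v hv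

theorem pvBfs_round (s : Int × Int) (k : Nat) :
    ∀ F : List (Int × Int), (∀ u ∈ F, pvReach s u ∧ pvDist s u = k) →
    ∀ st, pvBCore s k st →
      pvBCore s k (F.foldl pvBfsProcess st) ∧
      (∀ v, st.1.contains v = true → (F.foldl pvBfsProcess st).1.contains v = true) ∧
      (∀ u ∈ F, ∀ v ∈ pvGetNeighbors u, (F.foldl pvBfsProcess st).1.contains v = true) := by
  intro F
  induction F with
  | nil => exact fun _ st h => ⟨h, fun v hv => hv, by simp⟩
  | cons u F ih =>
      intro hF st hcore
      have hu := hF u (by simp)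
      obtain ⟨hcore', hmono', hall'⟩ :=
        pvBfs_visit_fold s k u hu.1 hu.2 (pvGetNeighbors u) (fun x hx => hx) st hcore
      obtain ⟨hcoreF, hmonoF, hallF⟩ := ih (fun x hx => hF x (by simp [hx])) _ hcore'
      rw [List.foldl_cons]
      refine ⟨hcoreF, fun v hv => hmonoF v (hmono' v hv), ?_⟩
      intro u' hu' v hv
      rcases List.mem_cons.mp hu' with rfl | hu'
      · exact hmonoF v (hall' v hv)
      · exact hallF u' hu' v hv

-- the per-round invariant of the BFS while-loop
def pvBInv (s : Int × Int) (k : Nat) (dist : PySem.Dict (Int × Int) Int)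
    (frontier : List (Int × Int)) : Prop :=
  (∀ v gv, dist.get? v = some gv →
      pvReach s v ∧ pvDist s v ≤ k ∧ gv = (pvDist s v : Int)) ∧
  (∀ v, pvReach s v → pvDist s v ≤ k → dist.contains v = true) ∧
  (∀ v, v ∈ frontier ↔ (pvReach s v ∧ pvDist s v = k))

theorem pvBInv_step (s : Int × Int) (k : Nat) (dist : PySem.Dict (Int × Int) Int)
    (frontier : List (Int × Int)) (h : pvBInv s k dist frontier) :
    pvBInv s (k + 1) (frontier.foldl pvBfsProcess (dist, [])).1
      (frontier.foldl pvBfsProcess (dist, [])).2 := by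
  obtain ⟨b1, b2, b3⟩ := h
  have hcore0 : pvBCore s k (dist, []) := by
    refine ⟨fun v gv hg => ?_, b2, fun v => ?_⟩
    · obtain ⟨h1, h2, h3⟩ := b1 v gv hg
      exact ⟨h1, by omega, h3⟩
    · simp only [List.not_mem_nil, false_iff]
      rintro ⟨hcv, hrv, hdv⟩
      rw [PySem.Dict.contains_eq_isSome_get?] at hcv
      obtain ⟨gv, hgv⟩ := Option.isSome_iff_exists.mp hcv
      have := (b1 v gv hgv).2.1
      omega
  obtain ⟨⟨c1, c2, c3⟩, hmono, hall⟩ :=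
    pvBfs_round s k frontier (fun u hu => (b3 u).mp hu) (dist, []) hcore0
  have b2' : ∀ v, pvReach s v → pvDist s v ≤ k + 1 →
      (frontier.foldl pvBfsProcess (dist, [])).1.contains v = true := by
    intro v hrv hdv
    rcases Nat.lt_or_ge (pvDist s v) (k + 1) with hlt | hge
    · exact c2 v hrv (by omega)
    · have hdv' : pvDist s v = k + 1 := by omega
      obtain ⟨u, hdu, hru, he⟩ := pvDist_pred hdv' hrv
      exact hall u ((b3 u).mpr ⟨⟨_, hru⟩, hdu⟩) v he
  refine ⟨c1, b2', fun v => ?_⟩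
  constructor
  · intro hv
    exact ((c3 v).mp hv).2
  · rintro ⟨hrv, hdv⟩
    exact (c3 v).mpr ⟨b2' v hrv (by omega), hrv, hdv⟩

theorem pvBfsLoop_spec (s : Int × Int) :
    ∀ (fuel k : Nat) (dist : PySem.Dict (Int × Int) Int) (frontier : List (Int × Int)),
    pvBInv s k dist frontier → 226 < k + fuel →
    ∀ v, (pvReach s v → (pvBfsLoop fuel dist frontier).get? v = some (pvDist s v : Int)) ∧
         (¬ pvReach s v → (pvBfsLoop fuel dist frontier).get? v = none) := by
  intro fuel
  induction fuel with
  | zero =>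
      intro k dist frontier h hk v
      obtain ⟨b1, b2, _⟩ := h
      unfold pvBfsLoop
      constructor
      · intro hrv
        have hle : pvDist s v ≤ k := by
          have := pvDist_le_225 hrv
          omega
        have hcv := b2 v hrv hle
        rw [PySem.Dict.contains_eq_isSome_get?] at hcv
        obtain ⟨gv, hgv⟩ := Option.isSome_iff_exists.mp hcv
        rw [hgv, (b1 v gv hgv).2.2]
      · intro hrv
        cases hgv : dist.get? v with
        | none => rfl
        | some gv => exact absurd (b1 v gv hgv).1 hrv
  | succ fuel ih =>
      intro k dist frontier h hk v
      obtain ⟨b1, b2, b3⟩ := h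
      unfold pvBfsLoop
      by_cases hf : frontier = []
      · rw [if_pos hf]
        constructor
        · intro hrv
          have hlt : pvDist s v ≤ k := by
            by_contra hge
            obtain ⟨w, hdw, hw2, _⟩ := pvDist_decomp hrv k (by omega)
            have : w ∈ frontier := (b3 w).mpr ⟨⟨k, hw2⟩, hdw⟩
            rw [hf] at this
            exact absurd this (List.not_mem_nil)
          have hcv := b2 v hrv hlt
          rw [PySem.Dict.contains_eq_isSome_get?] at hcv
          obtain ⟨gv, hgv⟩ := Option.isSome_iff_exists.mp hcv
          rw [hgv, (b1 v gv hgv).2.2]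
        · intro hrv
          cases hgv : dist.get? v with
          | none => rfl
          | some gv => exact absurd (b1 v gv hgv).1 hrv
      · rw [if_neg hf]
        exact ih (k + 1) _ _ (pvBInv_step s k dist frontier ⟨b1, b2, b3⟩) (by omega) v

theorem pvBfsDistances_get? (s v : Int × Int) :
    (pvReach s v → (pvBfsDistances s).get? v = some (pvDist s v : Int)) ∧
    (¬ pvReach s v → (pvBfsDistances s).get? v = none) := by
  have hinv : pvBInv s 0 (PySem.Dict.empty.insert s 0) [s] := by
    refine ⟨fun w gw hg => ?_, fun w hw hd => ?_, fun w => ?_⟩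
    · rw [PySem.Dict.get?_insert] at hg
      split at hg
      · rename_i hws
        subst hws
        have hgw : gw = 0 := (Option.some.inj hg).symm
        refine ⟨⟨0, pvReachN.refl _⟩, ?_, ?_⟩ <;> rw [pvDist_self] <;> simp [hgw]
      · rw [PySem.Dict.get?_empty] at hg
        exact absurd hg (by simp)
    · have hw0 : pvDist s w = 0 := by omega
      have : w = s := pvReachN_zero (hw0 ▸ pvReachN_dist hw)
      subst this
      rw [PySem.Dict.contains_insert_self]
    · simp only [List.mem_singleton]
      constructor
      · rintro rfl
        exact ⟨⟨0, pvReachN.refl w⟩, pvDist_self w⟩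
      · rintro ⟨hrw, hdw⟩
        exact (pvReachN_zero (hdw ▸ pvReachN_dist hrw))
  exact pvBfsLoop_spec s 300 0 _ _ hinv (by omega) v

theorem pvDB_spec (a b : Int × Int) :
    (pvReach a b → pvDB a b = (pvDist a b : Int)) ∧ (¬ pvReach a b → pvDB a b = 9999) := by
  constructor
  · intro h
    unfold pvDB
    rw [PySem.Dict.getD_eq_get?_getD, (pvBfsDistances_get? a b).1 h]
    rfl
  · intro h
    unfold pvDB
    rw [PySem.Dict.getD_eq_get?_getD, (pvBfsDistances_get? a b).2 h]
    rfl

-- ======================================================================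
-- A* correctness (port A's search)
-- ======================================================================

-- ----- the list-minimum pop is a genuine minimum -----

theorem pvEntryLt_trans {a b c : Int × Int × (Int × Int)}
    (h1 : pvEntryLt a b = true) (h2 : pvEntryLt b c = true) : pvEntryLt a c = true := by
  simp only [pvEntryLt, decide_eq_true_eq] at *
  obtain ⟨a1, a2, a3, a4⟩ := a
  obtain ⟨b1, b2, b3, b4⟩ := b
  obtain ⟨c1, c2, c3, c4⟩ := c
  dsimp at *
  omega

theorem pvEntryLt_irrefl (a : Int × Int × (Int × Int)) : pvEntryLt a a = false := by
  simp only [pvEntryLt, decide_eq_false_iff_not]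
  omega

theorem pvEntryLt_cross {a b c : Int × Int × (Int × Int)}
    (h1 : pvEntryLt a b = false) (h2 : pvEntryLt a c = true) : pvEntryLt b c = true := by
  simp only [pvEntryLt, decide_eq_true_eq, decide_eq_false_iff_not] at *
  obtain ⟨a1, a2, a3, a4⟩ := a
  obtain ⟨b1, b2, b3, b4⟩ := b
  obtain ⟨c1, c2, c3, c4⟩ := c
  dsimp at *
  omega

theorem pvEntryLt_false_fst {a b : Int × Int × (Int × Int)}
    (h : pvEntryLt a b = false) : b.1 ≤ a.1 := by
  simp only [pvEntryLt, decide_eq_false_iff_not] at h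
  omega

theorem pvFoldlMin_spec (xs : List (Int × Int × (Int × Int))) :
    ∀ x, (xs.foldl (fun m e => if pvEntryLt e m then e else m) x = x ∨
          xs.foldl (fun m e => if pvEntryLt e m then e else m) x ∈ xs) ∧
      ∀ e, (e = x ∨ e ∈ xs) →
        pvEntryLt e (xs.foldl (fun m e => if pvEntryLt e m then e else m) x) = false := by
  induction xs with
  | nil =>
      intro x
      refine ⟨Or.inl rfl, ?_⟩
      rintro e (rfl | he)
      · exact pvEntryLt_irrefl e
      · exact absurd he (List.not_mem_nil)
  | cons y ys ih =>
      intro x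
      simp only [List.foldl_cons]
      by_cases hlt : pvEntryLt y x = true
      · rw [if_pos hlt]
        obtain ⟨hmem, hmin⟩ := ih y
        refine ⟨?_, ?_⟩
        · rcases hmem with h | h
          · right; simp [h]
          · right; simp [h]
        · rintro e (rfl | he)
          · by_contra hc
            rw [Bool.not_eq_false] at hc
            have hym := hmin y (Or.inl rfl)
            simp [pvEntryLt_trans hlt hc] at hym
          · rcases List.mem_cons.mp he with rfl | he
            · exact hmin e (Or.inl rfl)
            · exact hmin e (Or.inr he)
      · rw [if_neg hlt]
        rw [Bool.not_eq_true] at hlt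
        obtain ⟨hmem, hmin⟩ := ih x
        refine ⟨?_, ?_⟩
        · rcases hmem with h | h
          · exact Or.inl h
          · right; simp [h]
        · rintro e (rfl | he)
          · exact hmin e (Or.inl rfl)
          · rcases List.mem_cons.mp he with rfl | he
            · by_contra hc
              rw [Bool.not_eq_false] at hc
              have hxm := hmin x (Or.inl rfl)
              simp [pvEntryLt_cross hlt hc] at hxm
            · exact hmin e (Or.inr he)

theorem pvHeapPop?_spec {l : List (Int × Int × (Int × Int))}
    {m : Int × Int × (Int × Int)} {rest : List (Int × Int × (Int × Int))}
    (h : pvHeapPop? l = some (m, rest)) :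
    m ∈ l ∧ rest = l.erase m ∧ ∀ e ∈ l, pvEntryLt e m = false := by
  cases l with
  | nil => exact absurd h (by simp [pvHeapPop?])
  | cons x xs =>
      simp only [pvHeapPop?, Option.some.injEq, Prod.mk.injEq] at h
      obtain ⟨hm, hrest⟩ := h
      subst hm
      obtain ⟨hmem, hmin⟩ := pvFoldlMin_spec xs x
      constructor
      · rcases hmem with h | h
        · rw [h]; exact List.mem_cons_self
        · exact List.mem_cons_of_mem _ h
      · refine ⟨hrest.symm, ?_⟩
        intro e he
        rcases List.mem_cons.mp he with rfl | he
        · exact hmin e (Or.inl rfl)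
        · exact hmin e (Or.inr he)

-- ----- the A* loop invariant -----

-- the optimal heap entry of a node
noncomputable def pvEOpt (s g v : Int × Int) : Int × Int × (Int × Int) :=
  ((pvDist s v : Int) + pvHeuristic v g, (pvDist s v : Int), v)

-- S-independent part of the invariant
structure pvACore (s g : Int × Int) (O : List (Int × Int × (Int × Int)))
    (C : PySem.Dict (Int × Int) (Int × Int)) (G : PySem.Dict (Int × Int) Int) : Prop where
  gs : G.get? s = some 0
  cs : C.get? s = none
  k1 : ∀ v gv, G.get? v = some gv → ∃ n : Nat, gv = (n : Int) ∧ pvReachN s v n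
  k2 : ∀ v gv, v ≠ s → G.get? v = some gv →
      ∃ u gu, C.get? v = some u ∧ G.get? u = some gu ∧ v ∈ pvGetNeighbors u ∧ gu + 1 ≤ gv
  k3 : ∀ e ∈ O, e.1 = e.2.1 + pvHeuristic e.2.2 g ∧
      (∃ n : Nat, e.2.1 = (n : Int) ∧ pvReachN s e.2.2 n) ∧
      ∃ gv, G.get? e.2.2 = some gv ∧ gv ≤ e.2.1
  k6 : ∀ v gv, G.get? v = some gv → (v = s ∨ pvFree v) ∧ 0 ≤ gv ∧ gv ≤ 226
  k7 : G.keys.Nodup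

-- full invariant, with the ghost settled set S
structure pvAInv (s g : Int × Int) (O : List (Int × Int × (Int × Int)))
    (C : PySem.Dict (Int × Int) (Int × Int)) (G : PySem.Dict (Int × Int) Int)
    (S : (Int × Int) → Prop) : Prop where
  core : pvACore s g O C G
  kg : ¬ S g
  k4 : ∀ v, S v → G.get? v = some (pvDist s v : Int) ∧
      ∀ nb ∈ pvGetNeighbors v, ∃ gn, G.get? nb = some gn ∧ gn ≤ (pvDist s v : Int) + 1
  k5 : ∀ v, G.get? v = some (pvDist s v : Int) → ¬ S v → pvEOpt s g v ∈ O

-- a node with a G value at least has the true distance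
theorem pvG_ge_dist {s g : Int × Int} {O C G} (core : pvACore s g O C G)
    {v : Int × Int} {gv : Int} (h : G.get? v = some gv) :
    pvReach s v ∧ (pvDist s v : Int) ≤ gv := by
  obtain ⟨n, rfl, hr⟩ := core.k1 v gv h
  exact ⟨⟨n, hr⟩, by exact_mod_cast pvDist_le hr⟩

-- frontier: a non-optimal reachable node has an optimal, unsettled ancestor
theorem pvFrontier {s g : Int × Int} {O C G S} (inv : pvAInv s g O C G S) :
    ∀ (n : Nat) (u : Int × Int), pvDist s u = n → pvReach s u →
    G.get? u ≠ some (pvDist s u : Int) →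
    ∃ w, ¬ S w ∧ G.get? w = some (pvDist s w : Int) ∧
      pvReachN w u (pvDist s u - pvDist s w) ∧ pvDist s w ≤ pvDist s u := by
  intro n
  induction n with
  | zero =>
      intro u hd hr hne
      have hu : u = s := pvReachN_zero (hd ▸ pvReachN_dist hr)
      subst hu
      rw [hd] at hne
      exact absurd (by rw [inv.core.gs]; norm_num) hne
  | succ n ih =>
      intro u hd hr hne
      obtain ⟨u', hdu', hru', e⟩ := pvDist_pred hd hr
      by_cases hS : S u'
      · obtain ⟨hGu', hnbs⟩ := inv.k4 u' hS
        obtain ⟨gn, hgn, hglen⟩ := hnbs u e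
        obtain ⟨_, hge⟩ := pvG_ge_dist inv.core hgn
        rw [hdu'] at hglen
        have : gn = (pvDist s u : Int) := by
          rw [hd]
          push_cast
          rw [hd] at hge
          push_cast at hge
          omega
        rw [this] at hgn
        exact absurd hgn hne
      · by_cases hG : G.get? u' = some (pvDist s u' : Int)
        · refine ⟨u', hS, hG, ?_, by omega⟩
          rw [hd, hdu']
          have : n + 1 - n = 1 := by omega
          rw [this]
          exact pvReachN.step (pvReachN.refl u') e
        · obtain ⟨w, hw1, hw2, hw3, hw4⟩ := ih u' hdu' ⟨_, hru'⟩ (by rw [hdu'] at hG ⊢; exact hG)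
          refine ⟨w, hw1, hw2, ?_, by omega⟩
          rw [hd]
          rw [hdu'] at hw3 hw4
          have : n + 1 - pvDist s w = (n - pvDist s w) + 1 := by omega
          rw [this]
          exact pvReachN.step hw3 e

-- at every pop, the popped node's g-score is already optimal
theorem pvPop_opt {s g : Int × Int} {O C G S m rest} (inv : pvAInv s g O C G S)
    (hpop : pvHeapPop? O = some (m, rest)) :
    G.get? m.2.2 = some (pvDist s m.2.2 : Int) ∧ pvReach s m.2.2 := by
  obtain ⟨hmem, _, hmin⟩ := pvHeapPop?_spec hpop
  obtain ⟨hf, ⟨n, hgn, hreach⟩, gv, hGv, hle⟩ := inv.core.k3 m hmem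
  have hr : pvReach s m.2.2 := ⟨n, hreach⟩
  refine ⟨?_, hr⟩
  by_contra hne
  rw [hGv] at hne
  have hne' : gv ≠ (pvDist s m.2.2 : Int) := fun hc => hne (by rw [hc])
  obtain ⟨w, hSw, hGw, hRw, hdw⟩ :=
    pvFrontier inv (pvDist s m.2.2) m.2.2 rfl hr (by rw [hGv]; intro hc; exact hne' (Option.some.inj hc))
  have hEw : pvEOpt s g w ∈ O := inv.k5 w hGw hSw
  have hminw := pvEntryLt_false_fst (hmin _ hEw)
  have hpath := pvHeuristic_path (g := g) hRw
  have hcast : ((pvDist s m.2.2 - pvDist s w : Nat) : Int) =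
      (pvDist s m.2.2 : Int) - (pvDist s w : Int) := by
    push_cast [hdw]
    ring
  rw [hcast] at hpath
  -- m.1 ≤ eOpt(w).1 = d w + h w ≤ d cur + h cur
  have h1 : m.1 ≤ (pvDist s w : Int) + pvHeuristic w g := hminw
  have h2 : (pvDist s w : Int) + pvHeuristic w g ≤
      (pvDist s m.2.2 : Int) + pvHeuristic m.2.2 g := by linarith
  rw [hf] at h1
  have h3 : m.2.1 ≤ (pvDist s m.2.2 : Int) := by linarith
  obtain ⟨_, hge⟩ := pvG_ge_dist inv.core hGv
  omega

-- ----- relaxation preserves the core invariant -----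

theorem pvRelax_preserve {s g cur nb : Int × Int} (hnb : nb ∈ pvGetNeighbors cur)
    (os : List (Int × Int × (Int × Int))) (cf : PySem.Dict (Int × Int) (Int × Int))
    (gs : PySem.Dict (Int × Int) Int)
    (core : pvACore s g os cf gs) (hGcur : gs.get? cur = some (pvDist s cur : Int)) :
    pvACore s g (pvRelax g cur (os, cf, gs) nb).1 (pvRelax g cur (os, cf, gs) nb).2.1
        (pvRelax g cur (os, cf, gs) nb).2.2 ∧
    (pvRelax g cur (os, cf, gs) nb).2.2.get? cur = some (pvDist s cur : Int) ∧
    (∀ e ∈ os, e ∈ (pvRelax g cur (os, cf, gs) nb).1) ∧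
    (∀ v gv, gs.get? v = some gv →
        ∃ gv', (pvRelax g cur (os, cf, gs) nb).2.2.get? v = some gv' ∧ gv' ≤ gv) ∧
    (∃ gn, (pvRelax g cur (os, cf, gs) nb).2.2.get? nb = some gn ∧
        gn ≤ (pvDist s cur : Int) + 1) ∧
    (∀ v, (pvRelax g cur (os, cf, gs) nb).2.2.get? v = some (pvDist s v : Int) →
        gs.get? v = some (pvDist s v : Int) ∨ pvEOpt s g v ∈ (pvRelax g cur (os, cf, gs) nb).1) := by
  have htent : gs.getD cur 0 = (pvDist s cur : Int) := by
    rw [PySem.Dict.getD_eq_get?_getD, hGcur]; rfl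
  simp only [pvRelax, htent]
  by_cases hcond : (gs.contains nb = false ∨ (pvDist s cur : Int) + 1 < gs.getD nb 0)
  case neg =>
    rw [if_neg hcond]
    push_neg at hcond
    obtain ⟨hcont, hge⟩ := hcond
    simp only [ne_eq, Bool.not_eq_false] at hcont
    have hsome : ∃ gn, gs.get? nb = some gn := by
      rw [PySem.Dict.contains_eq_isSome_get?] at hcont
      exact Option.isSome_iff_exists.mp hcont
    obtain ⟨gn, hgn⟩ := hsome
    have hgd : gs.getD nb 0 = gn := by rw [PySem.Dict.getD_eq_get?_getD, hgn]; rfl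
    refine ⟨core, hGcur, fun e he => he, fun v gv h => ⟨gv, h, le_refl _⟩, ?_, fun v h => Or.inl h⟩
    exact ⟨gn, hgn, by rw [hgd] at hge; omega⟩
  case pos =>
    rw [if_pos hcond]
    -- shared facts
    have hreachcur : pvReachN s cur (pvDist s cur) := by
      obtain ⟨n, hn, hr⟩ := core.k1 cur _ hGcur
      have : pvDist s cur = n := by exact_mod_cast hn
      rw [this]; exact hr
    have hd225 : pvDist s cur ≤ 225 := pvDist_le_225 ⟨_, hreachcur⟩
    have hne_s : nb ≠ s := by
      intro heq
      have hc : gs.contains nb = true := by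
        rw [heq, PySem.Dict.contains_eq_isSome_get?, core.gs]; rfl
      have hd : gs.getD nb 0 = 0 := by rw [heq, PySem.Dict.getD_eq_get?_getD, core.gs]; rfl
      rcases hcond with h | h
      · rw [hc] at h; exact absurd h (by simp)
      · rw [hd] at h
        have h0 : (0:Int) ≤ (pvDist s cur : Int) := Int.natCast_nonneg _
        omega
    have hnbcur : nb ≠ cur := by
      rintro rfl
      have := (pvMem_neighbors hnb).2
      simp at this
    have hreachnb : pvReachN s nb (pvDist s cur + 1) := pvReachN.step hreachcur hnb
    -- if nb had a g-score it was strictly larger than the new one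
    have hold : ∀ gv, gs.get? nb = some gv → (pvDist s cur : Int) + 1 < gv := by
      intro gv hgv
      rcases hcond with h | h
      · rw [PySem.Dict.contains_eq_isSome_get?, hgv] at h
        exact absurd h (by simp)
      · rw [PySem.Dict.getD_eq_get?_getD, hgv] at h
        exact h
    refine ⟨?_, ?_, ?_, ?_, ?_, ?_⟩
    · -- core
      refine ⟨?_, ?_, ?_, ?_, ?_, ?_, ?_⟩
      · rw [PySem.Dict.get?_insert_of_ne _ _ (Ne.symm hne_s)]; exact core.gs
      · rw [PySem.Dict.get?_insert_of_ne _ _ (Ne.symm hne_s)]; exact core.cs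
      · intro v gv h
        rw [PySem.Dict.get?_insert] at h
        split at h
        · rename_i hveq
          subst hveq
          refine ⟨pvDist s cur + 1, ?_, hreachnb⟩
          rw [← Option.some.inj h]; push_cast; ring
        · exact core.k1 v gv h
      · intro v gv hvs h
        rw [PySem.Dict.get?_insert] at h
        split at h
        · rename_i hveq
          subst hveq
          refine ⟨cur, (pvDist s cur : Int), PySem.Dict.get?_insert_self _ _ _, ?_, hnb, ?_⟩
          · rw [PySem.Dict.get?_insert_of_ne _ _ hnbcur.symm]
            exact hGcur
          · rw [← Option.some.inj h]
        · obtain ⟨u, gu, hC, hGu, he, hle⟩ := core.k2 v gv hvs h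
          rename_i hvne
          rw [← PySem.Dict.get?_insert_of_ne (k := nb) (v := cur) cf (fun hh => hvne hh)] at hC
          by_cases hub : u = nb
          · subst hub
            have hlt := hold gu hGu
            refine ⟨u, (pvDist s cur : Int) + 1, hC, PySem.Dict.get?_insert_self _ _ _, he, by omega⟩
          · refine ⟨u, gu, hC, ?_, he, hle⟩
            rw [PySem.Dict.get?_insert_of_ne _ _ hub]
            exact hGu
      · intro e he
        rcases List.mem_append.mp he with he | he
        · obtain ⟨hf, hpath, gv, hGv, hle⟩ := core.k3 e he
          refine ⟨hf, hpath, ?_⟩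
          by_cases hnbe : e.2.2 = nb
          · rw [hnbe]
            have hlt := hold gv (by rw [← hnbe]; exact hGv)
            exact ⟨(pvDist s cur : Int) + 1, PySem.Dict.get?_insert_self _ _ _, by omega⟩
          · exact ⟨gv, by rw [PySem.Dict.get?_insert_of_ne _ _ hnbe]; exact hGv, hle⟩
        · rw [List.mem_singleton.mp he]
          refine ⟨rfl, ⟨pvDist s cur + 1, by push_cast; ring, hreachnb⟩, ?_⟩
          exact ⟨(pvDist s cur : Int) + 1, PySem.Dict.get?_insert_self _ _ _, le_refl _⟩
      · intro v gv h
        rw [PySem.Dict.get?_insert] at h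
        split at h
        · rename_i hveq
          subst hveq
          have hgv : gv = (pvDist s cur : Int) + 1 := (Option.some.inj h).symm
          refine ⟨Or.inr (pvMem_neighbors hnb).1, by
            have h0 : (0:Int) ≤ (pvDist s cur : Int) := Int.natCast_nonneg _
            omega, ?_⟩
          rw [hgv]; push_cast; omega
        · exact core.k6 v gv h
      · exact PySem.Dict.nodup_keys_insert _ _ _ core.k7
    · rw [PySem.Dict.get?_insert_of_ne _ _ hnbcur.symm]; exact hGcur
    · intro e he; exact List.mem_append_left _ he
    · intro v gv h
      by_cases hveq : v = nb
      · subst hveq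
        have hlt := hold gv h
        exact ⟨(pvDist s cur : Int) + 1, PySem.Dict.get?_insert_self _ _ _, by omega⟩
      · exact ⟨gv, by rw [PySem.Dict.get?_insert_of_ne _ _ hveq]; exact h, le_refl _⟩
    · exact ⟨(pvDist s cur : Int) + 1, PySem.Dict.get?_insert_self _ _ _, le_refl _⟩
    · intro v h
      by_cases hveq : v = nb
      · subst hveq
        rw [PySem.Dict.get?_insert_self] at h
        have hdv : (pvDist s cur : Int) + 1 = (pvDist s v : Int) := Option.some.inj h
        right
        refine List.mem_append_right _ ?_
        rw [List.mem_singleton]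
        unfold pvEOpt
        rw [← hdv]
      · left
        rw [PySem.Dict.get?_insert_of_ne _ _ hveq] at h
        exact h

theorem pvRelax_fold {s g cur : Int × Int} :
    ∀ L : List (Int × Int), (∀ x ∈ L, x ∈ pvGetNeighbors cur) →
    ∀ (os : List (Int × Int × (Int × Int))) (cf : PySem.Dict (Int × Int) (Int × Int))
      (gs : PySem.Dict (Int × Int) Int),
    pvACore s g os cf gs → gs.get? cur = some (pvDist s cur : Int) →
      pvACore s g (L.foldl (pvRelax g cur) (os, cf, gs)).1
        (L.foldl (pvRelax g cur) (os, cf, gs)).2.1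
        (L.foldl (pvRelax g cur) (os, cf, gs)).2.2 ∧
      (L.foldl (pvRelax g cur) (os, cf, gs)).2.2.get? cur = some (pvDist s cur : Int) ∧
      (∀ e ∈ os, e ∈ (L.foldl (pvRelax g cur) (os, cf, gs)).1) ∧
      (∀ v gv, gs.get? v = some gv →
          ∃ gv', (L.foldl (pvRelax g cur) (os, cf, gs)).2.2.get? v = some gv' ∧ gv' ≤ gv) ∧
      (∀ nb ∈ L, ∃ gn, (L.foldl (pvRelax g cur) (os, cf, gs)).2.2.get? nb = some gn ∧
          gn ≤ (pvDist s cur : Int) + 1) ∧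
      (∀ v, (L.foldl (pvRelax g cur) (os, cf, gs)).2.2.get? v = some (pvDist s v : Int) →
          gs.get? v = some (pvDist s v : Int) ∨
            pvEOpt s g v ∈ (L.foldl (pvRelax g cur) (os, cf, gs)).1) := by
  intro L
  induction L with
  | nil =>
      intro _ os cf gs core hGcur
      exact ⟨core, hGcur, fun e he => he, fun v gv h => ⟨gv, h, le_refl _⟩,
        by simp, fun v h => Or.inl h⟩
  | cons nb L ih =>
      intro hsub os cf gs core hGcur
      obtain ⟨core1, hGcur1, hO1, hGm1, hnb1, hk51⟩ :=
        pvRelax_preserve (hsub nb (by simp)) os cf gs core hGcur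
      rw [List.foldl_cons]
      obtain ⟨coreF, hGcurF, hOF, hGmF, hnbF, hk5F⟩ :=
        ih (fun x hx => hsub x (by simp [hx]))
          (pvRelax g cur (os, cf, gs) nb).1 (pvRelax g cur (os, cf, gs) nb).2.1
          (pvRelax g cur (os, cf, gs) nb).2.2 core1 hGcur1
      refine ⟨coreF, hGcurF, fun e he => hOF e (hO1 e he), ?_, ?_, ?_⟩
      · intro v gv h
        obtain ⟨gv1, h1, hle1⟩ := hGm1 v gv h
        obtain ⟨gv2, h2, hle2⟩ := hGmF v gv1 h1
        exact ⟨gv2, h2, by omega⟩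
      · intro x hx
        rcases List.mem_cons.mp hx with rfl | hx
        · obtain ⟨gn, hgn, hle⟩ := hnb1
          obtain ⟨gn', hgn', hle'⟩ := hGmF x gn hgn
          exact ⟨gn', hgn', by omega⟩
        · exact hnbF x hx
      · intro v h
        rcases hk5F v h with h1 | h1
        · rcases hk51 v h1 with h2 | h2
          · exact Or.inl h2
          · exact Or.inr (hOF _ h2)
        · exact Or.inr h1

-- ----- path reconstruction -----

theorem pvHeapPop?_none {l : List (Int × Int × (Int × Int))}
    (h : pvHeapPop? l = none) : l = [] := by
  cases l with
  | nil => rfl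
  | cons x xs => exact absurd h (by simp [pvHeapPop?])

theorem pvNodup_subset_length {α : Type} [DecidableEq α] {l keys : List α}
    (hnd : l.Nodup) (hsub : ∀ x ∈ l, x ∈ keys) : l.length ≤ keys.length := by
  have h1 : l.toFinset.card = l.length := List.toFinset_card_of_nodup hnd
  have h3 := Finset.card_le_card
    (fun x hx => List.mem_toFinset.mpr (hsub x (List.mem_toFinset.mp hx)) :
      l.toFinset ⊆ keys.toFinset)
  have h4 := keys.toFinset_card_le
  omega

theorem pvNodup_mem_finset_length {α : Type} [DecidableEq α] {l : List α} {t : Finset α}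
    (hnd : l.Nodup) (hsub : ∀ x ∈ l, x ∈ t) : l.length ≤ t.card := by
  rw [← List.toFinset_card_of_nodup hnd]
  exact Finset.card_le_card (fun x hx => hsub x (List.mem_toFinset.mp hx))

theorem pvReconstruct_spec {s : Int × Int} {C : PySem.Dict (Int × Int) (Int × Int)}
    {G : PySem.Dict (Int × Int) Int}
    (hcs : C.get? s = none)
    (hk1 : ∀ v gv, G.get? v = some gv → ∃ n : Nat, gv = (n : Int) ∧ pvReachN s v n)
    (hk2 : ∀ v gv, v ≠ s → G.get? v = some gv →
        ∃ u gu, C.get? v = some u ∧ G.get? u = some gu ∧ v ∈ pvGetNeighbors u ∧ gu + 1 ≤ gv) :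
    ∀ (n : Nat) (v : Int × Int), G.get? v = some (n : Int) →
    ∃ l : List (Int × Int), l.length ≤ n ∧ pvReachN s v l.length ∧ l.Nodup ∧
      (∀ x ∈ l, C.contains x = true ∧ ∃ gx, G.get? x = some gx ∧ gx ≤ (n : Int)) ∧
      ∀ fuel, n ≤ fuel → ∀ acc, pvReconstruct fuel C v acc = acc ++ l := by
  intro n
  induction n using Nat.strong_induction_on with
  | _ n ih =>
      intro v hGv
      by_cases hv : v = s
      · subst hv
        refine ⟨[], by simp, pvReachN.refl v, List.nodup_nil, by simp, ?_⟩
        intro fuel _ acc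
        cases fuel with
        | zero => simp [pvReconstruct]
        | succ fuel => simp [pvReconstruct, hcs]
      · obtain ⟨u, gu, hC, hGu, he, hle⟩ := hk2 v _ hv hGv
        obtain ⟨mN, hmN, _⟩ := hk1 u gu hGu
        have hmlt : mN < n := by
          rw [hmN] at hle
          exact_mod_cast (by push_cast at hle ⊢; omega : (mN : Int) < (n : Int))
        rw [hmN] at hGu
        obtain ⟨l', hlen', hreach', hnd', hmem', heval'⟩ := ih mN hmlt u hGu
        refine ⟨v :: l', by simp; omega, ?_, ?_, ?_, ?_⟩
        · exact pvReachN.step hreach' he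
        · refine List.nodup_cons.mpr ⟨?_, hnd'⟩
          intro hvl
          obtain ⟨_, gx, hgx, hgxle⟩ := hmem' v hvl
          rw [hGv] at hgx
          have : (n : Int) = gx := Option.some.inj hgx
          rw [← this] at hgxle
          have : (n : Int) ≤ (mN : Int) := hgxle
          exact_mod_cast absurd (by exact_mod_cast this : n ≤ mN) (by omega)
        · intro x hx
          rcases List.mem_cons.mp hx with rfl | hx
          · refine ⟨by rw [PySem.Dict.contains_eq_isSome_get?, hC]; rfl, (n : Int), hGv, le_refl _⟩
          · obtain ⟨hc, gx, hgx, hgxle⟩ := hmem' x hx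
            refine ⟨hc, gx, hgx, ?_⟩
            have : (mN : Int) ≤ (n : Int) := by exact_mod_cast Nat.le_of_lt hmlt
            omega
        · intro fuel hfuel acc
          cases fuel with
          | zero => omega
          | succ fuel =>
              show pvReconstruct (fuel + 1) C v acc = acc ++ (v :: l')
              simp only [pvReconstruct, hC]
              rw [heval' fuel (by omega) (acc ++ [v])]
              simp

-- ----- the termination potential -----

def pvPot (O : List (Int × Int × (Int × Int))) (G : PySem.Dict (Int × Int) Int) : Nat :=
  O.length + (G.items.map (fun p => 2 * p.2.toNat)).sum + 460 * (226 - G.items.length)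

theorem pvSum_replace :
    ∀ (l : List ((Int × Int) × Int)) (nb : Int × Int) (vnew : Int),
    (l.map Prod.fst).Nodup → ∀ vold, (nb, vold) ∈ l →
    ((l.map (fun p => if p.1 == nb then (nb, vnew) else p)).map
        (fun p => 2 * p.2.toNat)).sum + 2 * vold.toNat
      = (l.map (fun p => 2 * p.2.toNat)).sum + 2 * vnew.toNat := by
  intro l
  induction l with
  | nil => intro nb vnew _ vold hmem; exact absurd hmem (List.not_mem_nil)
  | cons p l ih =>
      intro nb vnew hnd vold hmem
      rw [List.map_cons] at hnd
      rcases List.mem_cons.mp hmem with heq | hmem'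
      · subst heq
        have hnin : (nb, vold).1 ∉ l.map Prod.fst := (List.nodup_cons.mp hnd).1
        have hmap : l.map (fun p => if p.1 == nb then (nb, vnew) else p) = l := by
          conv_rhs => rw [← List.map_id l]
          refine List.map_congr_left ?_
          intro q hq
          have hqne : q.1 ≠ nb := by
            intro hc
            have hqm : q.1 ∈ l.map Prod.fst := List.mem_map_of_mem (f := Prod.fst) hq
            rw [hc] at hqm
            exact hnin hqm
          simp [hqne]
        simp only [List.map_cons, List.sum_cons, hmap]
        simp
        omega
      · have hpne : p.1 ≠ nb := by
          intro hc
          have : nb ∈ l.map Prod.fst := by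
            have := List.mem_map_of_mem (f := Prod.fst) hmem'
            exact this
          exact (List.nodup_cons.mp hnd).1 (by rw [hc]; exact this)
        have hbeq : (p.1 == nb) = false := by simp [hpne]
        have := ih nb vnew (List.nodup_cons.mp hnd).2 vold hmem'
        simp only [List.map_cons, List.sum_cons, hbeq, Bool.false_eq_true, if_false]
        omega

theorem pvG_items_le {s g : Int × Int} {O C G} (core : pvACore s g O C G) :
    G.items.length ≤ 226 := by
  have hnd : (G.items.map Prod.fst).Nodup := by
    have := core.k7
    simpa [PySem.Dict.keys] using this
  have hsub : ∀ k ∈ G.items.map Prod.fst,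
      k ∈ (insert s ((Finset.Icc (0:Int) 14) ×ˢ (Finset.Icc (0:Int) 14)) : Finset (Int × Int)) := by
    intro k hk
    have hget : G.get? k ≠ none := by
      intro hn
      rw [PySem.Dict.get?_eq_none_iff_not_mem_keys] at hn
      exact hn (by simpa [PySem.Dict.keys] using hk)
    obtain ⟨gv, hgv⟩ := Option.ne_none_iff_exists'.mp hget
    obtain ⟨hks, _, _⟩ := core.k6 k gv hgv
    rcases hks with rfl | hfree
    · exact Finset.mem_insert_self _ _
    · obtain ⟨h1, h2, h3, h4, _⟩ := hfree
      refine Finset.mem_insert_of_mem ?_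
      rw [Finset.mem_product, Finset.mem_Icc, Finset.mem_Icc]
      omega
  have hle := pvNodup_mem_finset_length hnd hsub
  have hc := Finset.card_insert_le s ((Finset.Icc (0:Int) 14) ×ˢ (Finset.Icc (0:Int) 14))
  rw [Finset.card_product] at hc
  simp [Int.card_Icc] at hc
  rw [List.length_map] at hle
  omega

theorem pvPot_relax {s g cur nb : Int × Int} (hnb : nb ∈ pvGetNeighbors cur)
    (os : List (Int × Int × (Int × Int))) (cf : PySem.Dict (Int × Int) (Int × Int))
    (gs : PySem.Dict (Int × Int) Int)
    (core : pvACore s g os cf gs) (hGcur : gs.get? cur = some (pvDist s cur : Int)) :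
    pvPot (pvRelax g cur (os, cf, gs) nb).1 (pvRelax g cur (os, cf, gs) nb).2.2 ≤
      pvPot os gs := by
  have htent : gs.getD cur 0 = (pvDist s cur : Int) := by
    rw [PySem.Dict.getD_eq_get?_getD, hGcur]; rfl
  have hreachcur : pvReachN s cur (pvDist s cur) := by
    obtain ⟨n, hn, hr⟩ := core.k1 cur _ hGcur
    have : pvDist s cur = n := by exact_mod_cast hn
    rw [this]; exact hr
  have hd225 : pvDist s cur ≤ 225 := pvDist_le_225 ⟨_, hreachcur⟩
  simp only [pvRelax, htent]
  by_cases hcond : (gs.contains nb = false ∨ (pvDist s cur : Int) + 1 < gs.getD nb 0)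
  case neg => rw [if_neg hcond]
  case pos =>
    rw [if_pos hcond]
    have hcore' := (pvRelax_preserve hnb os cf gs core hGcur).1
    simp only [pvRelax, htent, if_pos hcond] at hcore'
    have hndk : (gs.items.map Prod.fst).Nodup := by
      have := core.k7
      simpa [PySem.Dict.keys] using this
    have hd225' : ((pvDist s cur : Nat) : Int) ≤ 225 := by exact_mod_cast hd225
    have h0 : (0:Int) ≤ ((pvDist s cur : Nat) : Int) := Int.natCast_nonneg _
    unfold pvPot
    cases hcont : gs.contains nb with
    | true =>
        -- overwrite in place: the value strictly decreases
        have hsome : (gs.get? nb).isSome = true := by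
          rw [← PySem.Dict.contains_eq_isSome_get?]; exact hcont
        obtain ⟨gold, hgold⟩ := Option.isSome_iff_exists.mp hsome
        have hgd : gs.getD nb 0 = gold := by rw [PySem.Dict.getD_eq_get?_getD, hgold]; rfl
        have hlt : (pvDist s cur : Int) + 1 < gold := by
          rcases hcond with h | h
          · rw [hcont] at h; exact absurd h (by simp)
          · rw [hgd] at h; exact h
        obtain ⟨_, hg0, _⟩ := core.k6 nb gold hgold
        have hitems := PySem.Dict.items_insert_of_contains gs
          ((pvDist s cur : Int) + 1) hcont
        have hrep := pvSum_replace gs.items nb ((pvDist s cur : Int) + 1) hndk gold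
          (PySem.Dict.mem_items_of_get?_eq_some gs hgold)
        rw [hitems]
        simp only [List.length_append, List.map_append, List.sum_append,
          List.length_map, List.length_singleton]
        omega
    | false =>
        have hitems := PySem.Dict.items_insert_of_not_contains gs
          ((pvDist s cur : Int) + 1) hcont
        have hlen' := pvG_items_le hcore'
        rw [hitems] at hlen' ⊢
        simp only [List.length_append, List.map_append, List.sum_append,
          List.length_map, List.length_singleton, List.map_cons, List.map_nil,
          List.sum_cons, List.sum_nil] at hlen' ⊢
        omega

theorem pvPot_fold {s g cur : Int × Int} :
    ∀ L : List (Int × Int), (∀ x ∈ L, x ∈ pvGetNeighbors cur) →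
    ∀ (os : List (Int × Int × (Int × Int))) (cf : PySem.Dict (Int × Int) (Int × Int))
      (gs : PySem.Dict (Int × Int) Int),
    pvACore s g os cf gs → gs.get? cur = some (pvDist s cur : Int) →
    pvPot (L.foldl (pvRelax g cur) (os, cf, gs)).1
        (L.foldl (pvRelax g cur) (os, cf, gs)).2.2 ≤ pvPot os gs := by
  intro L
  induction L with
  | nil => intro _ os cf gs _ _; exact le_refl _
  | cons nb L ih =>
      intro hsub os cf gs core hGcur
      obtain ⟨core1, hGcur1, _, _, _, _⟩ :=
        pvRelax_preserve (hsub nb (by simp)) os cf gs core hGcur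
      rw [List.foldl_cons]
      have hstep := pvPot_relax (hsub nb (by simp)) os cf gs core hGcur
      have hrest := ih (fun x hx => hsub x (by simp [hx]))
        (pvRelax g cur (os, cf, gs) nb).1 (pvRelax g cur (os, cf, gs) nb).2.1
        (pvRelax g cur (os, cf, gs) nb).2.2 core1 hGcur1
      have heta : ((pvRelax g cur (os, cf, gs) nb).1, (pvRelax g cur (os, cf, gs) nb).2.1,
          (pvRelax g cur (os, cf, gs) nb).2.2) = pvRelax g cur (os, cf, gs) nb := rfl
      rw [heta] at hrest
      omega

-- ----- the main loop -----

theorem pvAStarLoop_succ (start goal : Int × Int) (fuel : Nat)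
    (O : List (Int × Int × (Int × Int))) (C : PySem.Dict (Int × Int) (Int × Int))
    (G : PySem.Dict (Int × Int) Int) {m rest} (h : pvHeapPop? O = some (m, rest)) :
    pvAStarLoop start goal (fuel + 1) O C G =
      if m.2.2 = goal then
        ((pvReconstruct (C.items.length + 1) C m.2.2 []) ++ [start]).reverse
      else
        pvAStarLoop start goal fuel
          ((pvGetNeighbors m.2.2).foldl (pvRelax goal m.2.2) (rest, C, G)).1
          ((pvGetNeighbors m.2.2).foldl (pvRelax goal m.2.2) (rest, C, G)).2.1
          ((pvGetNeighbors m.2.2).foldl (pvRelax goal m.2.2) (rest, C, G)).2.2 := by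
  obtain ⟨mf', mg', cur'⟩ := m
  conv_lhs => rw [pvAStarLoop]
  rw [h]

theorem pvAStarLoop_spec {s g : Int × Int} :
    ∀ (fuel : Nat) (O : List (Int × Int × (Int × Int)))
      (C : PySem.Dict (Int × Int) (Int × Int)) (G : PySem.Dict (Int × Int) Int)
      (S : (Int × Int) → Prop),
    pvAInv s g O C G S → pvPot O G < fuel →
    (pvReach s g → (pvAStarLoop s g fuel O C G).length = pvDist s g + 1) ∧
    (¬ pvReach s g → pvAStarLoop s g fuel O C G = []) := by
  intro fuel
  induction fuel with
  | zero => intro O C G S _ hpot; exact absurd hpot (Nat.not_lt_zero _)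
  | succ fuel ih =>
      intro O C G S inv hpot
      cases hpop : pvHeapPop? O with
      | none =>
          have hO := pvHeapPop?_none hpop
          have hres : pvAStarLoop s g (fuel + 1) O C G = [] := by
            unfold pvAStarLoop
            rw [hpop]
          refine ⟨?_, fun _ => hres⟩
          intro hr
          exfalso
          by_cases hG : G.get? g = some (pvDist s g : Int)
          · have := inv.k5 g hG inv.kg
            rw [hO] at this
            exact absurd this (List.not_mem_nil)
          · obtain ⟨w, hSw, hGw, _, _⟩ := pvFrontier inv (pvDist s g) g rfl hr hG
            have := inv.k5 w hGw hSw
            rw [hO] at this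
            exact absurd this (List.not_mem_nil)
      | some pr =>
          obtain ⟨m, rest⟩ := pr
          obtain ⟨mf, mg, cur⟩ := m
          have hGcur : G.get? cur = some (pvDist s cur : Int) := (pvPop_opt inv hpop).1
          have hrcur : pvReach s cur := (pvPop_opt inv hpop).2
          obtain ⟨hmem, hrest, hmin⟩ := pvHeapPop?_spec hpop
          by_cases hcur : cur = g
          · subst hcur
            have hres : pvAStarLoop s cur (fuel + 1) O C G =
                ((pvReconstruct (C.items.length + 1) C cur []) ++ [s]).reverse := by
              rw [pvAStarLoop_succ s cur fuel O C G hpop, if_pos rfl]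
            obtain ⟨l, hlen, hreach, hnd, hmemx, heval⟩ :=
              pvReconstruct_spec inv.core.cs inv.core.k1 inv.core.k2
                (pvDist s cur) cur hGcur
            have hge : pvDist s cur ≤ l.length := pvDist_le hreach
            have hleq : l.length = pvDist s cur := by omega
            have hsubk : ∀ x ∈ l, x ∈ C.keys := by
              intro x hx
              have hcx := (hmemx x hx).1
              rw [PySem.Dict.contains_eq_isSome_get?] at hcx
              obtain ⟨ux, hux⟩ := Option.isSome_iff_exists.mp hcx
              by_contra hxk
              rw [← PySem.Dict.get?_eq_none_iff_not_mem_keys] at hxk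
              rw [hxk] at hux
              exact absurd hux (by simp)
            have hlk : l.length ≤ C.items.length := by
              have := pvNodup_subset_length hnd hsubk
              simpa [PySem.Dict.keys] using this
            have heq := heval (C.items.length + 1) (by omega) []
            refine ⟨fun _ => ?_, fun hnr => absurd hrcur hnr⟩
            rw [hres, heq]
            simp [hleq]
          · set st := (pvGetNeighbors cur).foldl (pvRelax g cur) (rest, C, G) with hst
            have hcore_rest : pvACore s g rest C G := by
              refine ⟨inv.core.gs, inv.core.cs, inv.core.k1, inv.core.k2, ?_,
                inv.core.k6, inv.core.k7⟩
              intro e' he'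
              exact inv.core.k3 e' (by rw [hrest] at he'; exact List.mem_of_mem_erase he')
            obtain ⟨coreF, hGcurF, hOF, hGmF, hnbF, hk5F⟩ :=
              pvRelax_fold (pvGetNeighbors cur) (fun x hx => hx) rest C G hcore_rest hGcur
            have invF : pvAInv s g st.1 st.2.1 st.2.2 (fun v => S v ∨ v = cur) := by
              refine ⟨coreF, ?_, ?_, ?_⟩
              · rintro (h | h)
                · exact inv.kg h
                · exact hcur h.symm
              · intro v hv
                rcases hv with hv | rfl
                · obtain ⟨hGv, hnbs⟩ := inv.k4 v hv
                  obtain ⟨gv', hGv', hle'⟩ := hGmF v _ hGv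
                  obtain ⟨_, hge'⟩ := pvG_ge_dist coreF hGv'
                  have hgve : gv' = (pvDist s v : Int) := by omega
                  refine ⟨by rw [hGv', hgve], ?_⟩
                  intro nb hnb
                  obtain ⟨gn, hgn, hlen⟩ := hnbs nb hnb
                  obtain ⟨gn', hgn', hle''⟩ := hGmF nb _ hgn
                  exact ⟨gn', hgn', by omega⟩
                · exact ⟨hGcurF, hnbF⟩
              · intro v hGv hSv
                have hv1 : ¬ S v := fun h => hSv (Or.inl h)
                have hv2 : v ≠ cur := fun h => hSv (Or.inr h)
                rcases hk5F v hGv with hold | hnew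
                · have hEv := inv.k5 v hold hv1
                  refine hOF _ ?_
                  rw [hrest]
                  refine (List.mem_erase_of_ne ?_).mpr hEv
                  intro hc
                  exact hv2 (congrArg (fun e => e.2.2) hc)
                · exact hnew
            have hpotF := pvPot_fold (pvGetNeighbors cur) (fun x hx => hx)
              rest C G hcore_rest hGcur
            rw [← hst] at hpotF
            have hOlen : 0 < O.length := List.length_pos_of_mem hmem
            have hlenrest : rest.length = O.length - 1 := by
              rw [hrest, List.length_erase_of_mem hmem]
            have hpotrest : pvPot rest G + 1 ≤ pvPot O G := by
              unfold pvPot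
              omega
            have hres : pvAStarLoop s g (fuel + 1) O C G =
                pvAStarLoop s g fuel st.1 st.2.1 st.2.2 := by
              rw [pvAStarLoop_succ s g fuel O C G hpop, if_neg hcur]
            rw [hres]
            exact ih st.1 st.2.1 st.2.2 _ invF (by omega)

theorem pvD_spec (a b : Int × Int) :
    (pvReach a b → pvD a b = (pvDist a b : Int)) ∧ (¬ pvReach a b → pvD a b = 9999) := by
  by_cases hab : a = b
  · subst hab
    have hr : pvReach a a := ⟨0, pvReachN.refl a⟩
    refine ⟨fun _ => ?_, fun hnr => absurd hr hnr⟩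
    unfold pvD pvAStar
    rw [if_pos rfl, pvDist_self]
    simp
  · have hinv : pvAInv a b [(pvHeuristic a b, 0, a)] PySem.Dict.empty
        (PySem.Dict.empty.insert a 0) (fun _ => False) := by
      refine ⟨⟨?_, ?_, ?_, ?_, ?_, ?_, ?_⟩, ?_, ?_, ?_⟩
      · exact PySem.Dict.get?_insert_self _ _ _
      · exact PySem.Dict.get?_empty _
      · intro v gv h
        rw [PySem.Dict.get?_insert] at h
        split at h
        · rename_i hva
          subst hva
          exact ⟨0, by simpa using (Option.some.inj h).symm, pvReachN.refl _⟩
        · rw [PySem.Dict.get?_empty] at h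
          exact absurd h (by simp)
      · intro v gv hvs h
        rw [PySem.Dict.get?_insert, if_neg hvs, PySem.Dict.get?_empty] at h
        exact absurd h (by simp)
      · intro e he
        rw [List.mem_singleton] at he
        subst he
        refine ⟨by simp, ⟨0, by simp, pvReachN.refl _⟩, 0, ?_, by simp⟩
        exact PySem.Dict.get?_insert_self _ _ _
      · intro v gv h
        rw [PySem.Dict.get?_insert] at h
        split at h
        · rename_i hva
          subst hva
          have : gv = 0 := (Option.some.inj h).symm
          exact ⟨Or.inl rfl, by omega, by omega⟩
        · rw [PySem.Dict.get?_empty] at h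
          exact absurd h (by simp)
      · exact PySem.Dict.nodup_keys_insert _ _ _ PySem.Dict.nodup_keys_empty
      · exact fun h => h
      · intro v hv
        exact absurd hv (fun h => h)
      · intro v hG _
        rw [PySem.Dict.get?_insert] at hG
        split at hG
        · rename_i hva
          rw [List.mem_singleton, hva]
          unfold pvEOpt
          rw [pvDist_self]
          simp
        · rw [PySem.Dict.get?_empty] at hG
          exact absurd hG (by simp)
    have hpot : pvPot [(pvHeuristic a b, 0, a)] (PySem.Dict.empty.insert a 0) < 1000000 := by
      unfold pvPot
      rw [PySem.Dict.items_insert_of_not_contains PySem.Dict.empty 0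
        (PySem.Dict.contains_empty a)]
      simp [PySem.Dict.empty]
    obtain ⟨h1, h2⟩ := pvAStarLoop_spec 1000000 _ _ _ _ hinv hpot
    constructor
    · intro hr
      have hlen := h1 hr
      unfold pvD pvAStar
      rw [if_neg hab]
      have hne : pvAStarLoop a b 1000000 [(pvHeuristic a b, 0, a)] PySem.Dict.empty
          (PySem.Dict.empty.insert a 0) ≠ [] := by
        intro hc
        rw [hc] at hlen
        simp at hlen
      rw [if_pos hne, hlen]
      push_cast
      ring
    · intro hnr
      have hnil := h2 hnr
      unfold pvD pvAStar
      rw [if_neg hab, hnil]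
      simp

-- the crown: both per-pair distances agree
theorem pvD_eq_pvDB (a b : Int × Int) : pvD a b = pvDB a b := by
  by_cases h : pvReach a b
  · rw [(pvD_spec a b).1 h, (pvDB_spec a b).1 h]
  · rw [(pvD_spec a b).2 h, (pvDB_spec a b).2 h]

-- ======================================================================
-- Matrix-fill machinery (shared by both ports' outer loops)
-- ======================================================================

-- the common characterisation of both matrices: entry (i, j)
def pvE (locs : List (Int × Int)) (i j : Nat) : Int :=
  if i = j then 0
  else if i < j then pvD (locs.getD i (0, 0)) (locs.getD j (0, 0))
  else pvD (locs.getD j (0, 0)) (locs.getD i (0, 0))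

def pvEB (locs : List (Int × Int)) (i j : Nat) : Int :=
  if i = j then 0
  else if i < j then pvDB (locs.getD i (0, 0)) (locs.getD j (0, 0))
  else pvDB (locs.getD j (0, 0)) (locs.getD i (0, 0))

theorem pvE_eq_pvEB (locs : List (Int × Int)) (i j : Nat) : pvE locs i j = pvEB locs i j := by
  unfold pvE pvEB
  rw [pvD_eq_pvDB, pvD_eq_pvDB]

def pvSpecMat (locs : List (Int × Int)) : List (List Int) :=
  (List.range locs.length).map (fun i => (List.range locs.length).map (fun j => pvE locs i j))

def pvSpecMatB (locs : List (Int × Int)) : List (List Int) :=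
  (List.range locs.length).map (fun i => (List.range locs.length).map (fun j => pvEB locs i j))

-- ----- nested-list update lemmas (shared by both fills) -----

theorem pvSet2_norm (m : List (List Int)) (a b : Nat) (v : Int) :
    pvSet2 m (a : Int) (b : Int) v = m.set a ((m.getD a []).set b v) := by
  simp [pvSet2]

theorem pvSet2_shape (m : List (List Int)) (a b : Nat) (v : Int) (n : Nat)
    (hm : m.length = n) (hr : ∀ r ∈ m, r.length = n) (ha : a < n) :
    (pvSet2 m (a : Int) (b : Int) v).length = n ∧
      ∀ r ∈ pvSet2 m (a : Int) (b : Int) v, r.length = n := by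
  rw [pvSet2_norm]
  refine ⟨by simpa using hm, fun r hrm => ?_⟩
  rcases List.mem_or_eq_of_mem_set hrm with h | h
  · exact hr r h
  · subst h
    rw [List.length_set]
    rw [List.getD_eq_getElem m [] (by omega)]
    exact hr _ (List.getElem_mem _)

theorem pvSet2_acc (m : List (List Int)) (a b p q : Nat) (v : Int) (n : Nat)
    (hm : m.length = n) (hr : ∀ r ∈ m, r.length = n) (ha : a < n) (hb : b < n) (hp : p < n) :
    ((pvSet2 m (a : Int) (b : Int) v).getD p []).getD q 0 =
      if p = a ∧ q = b then v else (m.getD p []).getD q 0 := by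
  rw [pvSet2_norm]
  have hrowlen : (m.getD a []).length = n := by
    rw [List.getD_eq_getElem m [] (by omega)]
    exact hr _ (List.getElem_mem _)
  by_cases hpa : p = a
  · subst hpa
    rw [List.getD_eq_getElem?_getD (l := m.set p _), List.getElem?_set]
    simp only [hm, hp, if_pos, Option.getD_some]
    by_cases hqb : q = b
    · subst hqb
      rw [List.getD_eq_getElem?_getD, List.getElem?_set]
      simp only [hrowlen]
      simp [hb]
    · rw [List.getD_eq_getElem?_getD, List.getElem?_set, if_neg (fun hh => hqb hh.symm),
        ← List.getD_eq_getElem?_getD]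
      simp [hqb]
  · rw [List.getD_eq_getElem?_getD (l := m.set a _), List.getElem?_set,
      if_neg (fun hh => hpa hh.symm), ← List.getD_eq_getElem?_getD]
    simp [hpa]

-- ===== A side: the fill invariant =====
-- entries with row or column index handled so far equal pvE; the rest still hold the placeholder
def pvAcc (locs : List (Int × Int)) (k t : Nat) (m : List (List Int)) : Prop :=
  m.length = locs.length ∧ (∀ r ∈ m, r.length = locs.length) ∧
  ∀ i j : Nat, i < locs.length → j < locs.length →
    (m.getD i []).getD j 0 =
      if i < k ∨ j < k ∨ (i = k ∧ j < t) ∨ (j = k ∧ i < t) then pvE locs i j else 0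

theorem pvA_diag (locs : List (Int × Int)) (k : Nat) (m : List (List Int))
    (hk : k < locs.length) (h : pvAcc locs k k m) :
    pvAcc locs k (k + 1) (pvSet2 m (k : Int) (k : Int) 0) := by
  obtain ⟨hm, hr, hacc⟩ := h
  obtain ⟨hm', hr'⟩ := pvSet2_shape m k k 0 locs.length hm hr hk
  refine ⟨hm', hr', fun i j hi hj => ?_⟩
  rw [pvSet2_acc m k k i j 0 locs.length hm hr hk hk hi, hacc i j hi hj]
  by_cases h1 : i = k ∧ j = k
  · rw [if_pos h1, if_pos (by omega)]
    rcases h1 with ⟨rfl, rfl⟩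
    unfold pvE
    rw [if_pos rfl]
  · rw [if_neg h1]
    by_cases hc : i < k ∨ j < k ∨ (i = k ∧ j < k) ∨ (j = k ∧ i < k)
    · rw [if_pos hc, if_pos (by omega)]
    · rw [if_neg hc, if_neg (by omega)]

theorem pvA_pair (locs : List (Int × Int)) (k t : Nat) (m : List (List Int))
    (hkt : k < t) (ht : t < locs.length) (h : pvAcc locs k t m) :
    pvAcc locs k (t + 1)
      (pvSet2 (pvSet2 m (k : Int) (t : Int) (pvD (locs.getD k (0,0)) (locs.getD t (0,0))))
        (t : Int) (k : Int) (pvD (locs.getD k (0,0)) (locs.getD t (0,0)))) := by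
  obtain ⟨hm, hr, hacc⟩ := h
  obtain ⟨hm1, hr1⟩ := pvSet2_shape m k t (pvD (locs.getD k (0,0)) (locs.getD t (0,0))) locs.length hm hr (by omega)
  obtain ⟨hm2, hr2⟩ := pvSet2_shape _ t k (pvD (locs.getD k (0,0)) (locs.getD t (0,0))) locs.length hm1 hr1 ht
  refine ⟨hm2, hr2, fun i j hi hj => ?_⟩
  rw [pvSet2_acc _ t k i j _ locs.length hm1 hr1 ht (by omega) hi,
      pvSet2_acc m k t i j _ locs.length hm hr (by omega) ht hi,
      hacc i j hi hj]
  by_cases h1 : i = t ∧ j = k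
  · rw [if_pos h1, if_pos (by omega)]
    rcases h1 with ⟨rfl, rfl⟩
    unfold pvE
    rw [if_neg (by omega), if_neg (by omega)]
  · rw [if_neg h1]
    by_cases h2 : i = k ∧ j = t
    · rw [if_pos h2, if_pos (by omega)]
      rcases h2 with ⟨rfl, rfl⟩
      unfold pvE
      rw [if_neg (by omega), if_pos hkt]
    · rw [if_neg h2]
      by_cases hc : i < k ∨ j < k ∨ (i = k ∧ j < t) ∨ (j = k ∧ i < t)
      · rw [if_pos hc, if_pos (by omega)]
      · rw [if_neg hc, if_neg (by omega)]

theorem pvA_inner (locs : List (Int × Int)) (k : Nat) (d : Nat) :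
    ∀ (t : Nat) (m : List (List Int)), k < t → t + d = locs.length → pvAcc locs k t m →
    pvAcc locs k locs.length
      ((PySem.List.pyRange (t : Int) (locs.length : Int) 1).foldl (fun m j =>
        let path := pvAStar (PySem.List.pyGetD locs (k : Int) (0, 0)) (PySem.List.pyGetD locs j (0, 0))
        let dist : Int := if path ≠ [] then (path.length : Int) - 1 else 9999
        pvSet2 (pvSet2 m (k : Int) j dist) j (k : Int) dist) m) := by
  induction d with
  | zero =>
      intro t m hkt htn hacc
      have ht : t = locs.length := by omega
      subst ht
      rw [PySem.List.pyRange_one_eq_nil (le_refl _)]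
      exact hacc
  | succ d ih =>
      intro t m hkt htn hacc
      have htlt : t < locs.length := by omega
      rw [PySem.List.pyRange_one_cons (by exact_mod_cast htlt), List.foldl_cons]
      have hstep : (let path := pvAStar (PySem.List.pyGetD locs (k : Int) (0, 0)) (PySem.List.pyGetD locs (t : Int) (0, 0))
          let dist : Int := if path ≠ [] then (path.length : Int) - 1 else 9999
          pvSet2 (pvSet2 m (k : Int) (t : Int) dist) (t : Int) (k : Int) dist) =
          pvSet2 (pvSet2 m (k : Int) (t : Int) (pvD (locs.getD k (0,0)) (locs.getD t (0,0))))
            (t : Int) (k : Int) (pvD (locs.getD k (0,0)) (locs.getD t (0,0))) := by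
        simp [pvD]
      rw [hstep]
      have hacc' := pvA_pair locs k t m hkt htlt hacc
      have hrec := ih (t + 1) _ (by omega) (by omega) hacc'
      have hc : ((t + 1 : Nat) : Int) = (t : Int) + 1 := by push_cast; ring
      rw [hc] at hrec
      exact hrec

theorem pvA_round (locs : List (Int × Int)) (k : Nat) (m : List (List Int))
    (hk : k < locs.length) (h : pvAcc locs k k m) :
    pvAcc locs (k + 1) (k + 1)
      ((PySem.List.pyRange ((k : Int) + 1) (locs.length : Int) 1).foldl (fun m j =>
        let path := pvAStar (PySem.List.pyGetD locs (k : Int) (0, 0)) (PySem.List.pyGetD locs j (0, 0))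
        let dist : Int := if path ≠ [] then (path.length : Int) - 1 else 9999
        pvSet2 (pvSet2 m (k : Int) j dist) j (k : Int) dist) (pvSet2 m (k : Int) (k : Int) 0)) := by
  have h1 := pvA_diag locs k m hk h
  have h2 := pvA_inner locs k (locs.length - (k + 1)) (k + 1) _ (by omega) (by omega) h1
  rw [show ((k + 1 : Nat) : Int) = (k : Int) + 1 by push_cast; ring] at h2
  obtain ⟨hm, hr, hacc⟩ := h2
  refine ⟨hm, hr, fun i j hi hj => ?_⟩
  rw [hacc i j hi hj]
  by_cases hc : i < k ∨ j < k ∨ (i = k ∧ j < locs.length) ∨ (j = k ∧ i < locs.length)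
  · rw [if_pos hc, if_pos (by omega)]
  · rw [if_neg hc, if_neg (by omega)]

theorem pvA_fold (locs : List (Int × Int)) (k : Nat) (hk : k ≤ locs.length) :
    pvAcc locs k k
      ((List.range k).foldl (fun m (i : Nat) =>
        (PySem.List.pyRange ((i : Int) + 1) (locs.length : Int) 1).foldl (fun m j =>
          let path := pvAStar (PySem.List.pyGetD locs (i : Int) (0, 0)) (PySem.List.pyGetD locs j (0, 0))
          let dist : Int := if path ≠ [] then (path.length : Int) - 1 else 9999
          pvSet2 (pvSet2 m (i : Int) j dist) j (i : Int) dist) (pvSet2 m (i : Int) (i : Int) 0))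
        (List.replicate locs.length (List.replicate locs.length (0 : Int)))) := by
  induction k with
  | zero =>
      simp only [List.range_zero, List.foldl_nil]
      refine ⟨by simp, fun r hr => ?_, fun i j hi hj => ?_⟩
      · rw [List.eq_of_mem_replicate hr]; simp
      · rw [if_neg (by omega)]
        have h0 : (List.replicate locs.length (List.replicate locs.length (0 : Int))).getD i [] =
            List.replicate locs.length (0 : Int) := by
          rw [List.getD_eq_getElem _ _ (by simpa using hi)]
          exact List.getElem_replicate _
        rw [h0, List.getD_eq_getElem _ _ (by simpa using hj), List.getElem_replicate]
  | succ k ih =>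
      rw [List.range_succ, List.foldl_append, List.foldl_cons, List.foldl_nil]
      exact pvA_round locs k _ (by omega) (ih (by omega))

theorem pvA_eq_spec (locs : List (Int × Int)) : build_distance_matrix locs = pvSpecMat locs := by
  have hfold := pvA_fold locs locs.length (le_refl _)
  have hport : build_distance_matrix locs =
      (List.range locs.length).foldl (fun m (i : Nat) =>
        (PySem.List.pyRange ((i : Int) + 1) (locs.length : Int) 1).foldl (fun m j =>
          let path := pvAStar (PySem.List.pyGetD locs (i : Int) (0, 0)) (PySem.List.pyGetD locs j (0, 0))
          let dist : Int := if path ≠ [] then (path.length : Int) - 1 else 9999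
          pvSet2 (pvSet2 m (i : Int) j dist) j (i : Int) dist) (pvSet2 m (i : Int) (i : Int) 0))
        (List.replicate locs.length (List.replicate locs.length (0 : Int))) := by
    have hrange : PySem.List.pyRange 0 (locs.length : Int) 1 =
        (List.range locs.length).map (fun k : Nat => (k : Int)) := by
      rw [PySem.List.pyRange_one]
      simp
    unfold build_distance_matrix
    simp only [PySem.List.len_eq, hrange, List.foldl_map, Int.toNat_natCast]
  rw [hport]
  obtain ⟨hm, hr, hacc⟩ := hfold
  refine List.ext_getElem (by rw [hm]; simp [pvSpecMat]) (fun i hi1 hi2 => ?_)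
  refine List.ext_getElem ?_ (fun j hj1 hj2 => ?_)
  · rw [hr _ (List.getElem_mem _)]
    simp [pvSpecMat] at hi2 ⊢
  · have hi : i < locs.length := by rwa [hm] at hi1
    have hj : j < locs.length := by
      have := hr _ (List.getElem_mem hi1)
      omega
    have := hacc i j hi hj
    rw [if_pos (by omega)] at this
    rw [List.getD_eq_getElem _ _ hi1, List.getD_eq_getElem _ _ hj1] at this
    rw [this]
    simp [pvSpecMat]

-- ===== B side: the fill invariant (no diagonal writes; the 0 placeholder IS the diagonal) =====
def pvAccB (locs : List (Int × Int)) (k t : Nat) (m : List (List Int)) : Prop :=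
  m.length = locs.length ∧ (∀ r ∈ m, r.length = locs.length) ∧
  ∀ i j : Nat, i < locs.length → j < locs.length →
    (m.getD i []).getD j 0 =
      if i = j ∨ i < k ∨ j < k ∨ (i = k ∧ j < t) ∨ (j = k ∧ i < t) then pvEB locs i j else 0

theorem pvB_kk (locs : List (Int × Int)) (k : Nat) (m : List (List Int))
    (h : pvAccB locs k k m) : pvAccB locs k (k + 1) m := by
  obtain ⟨hm, hr, hacc⟩ := h
  refine ⟨hm, hr, fun i j hi hj => ?_⟩
  rw [hacc i j hi hj]
  by_cases hc : i = j ∨ i < k ∨ j < k ∨ (i = k ∧ j < k) ∨ (j = k ∧ i < k)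
  · rw [if_pos hc, if_pos (by omega)]
  · rw [if_neg hc, if_neg (by omega)]

theorem pvB_pair (locs : List (Int × Int)) (k t : Nat) (m : List (List Int))
    (hkt : k < t) (ht : t < locs.length) (h : pvAccB locs k t m) :
    pvAccB locs k (t + 1)
      (pvSet2 (pvSet2 m (k : Int) (t : Int) (pvDB (locs.getD k (0,0)) (locs.getD t (0,0))))
        (t : Int) (k : Int) (pvDB (locs.getD k (0,0)) (locs.getD t (0,0)))) := by
  obtain ⟨hm, hr, hacc⟩ := h
  obtain ⟨hm1, hr1⟩ := pvSet2_shape m k t (pvDB (locs.getD k (0,0)) (locs.getD t (0,0))) locs.length hm hr (by omega)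
  obtain ⟨hm2, hr2⟩ := pvSet2_shape _ t k (pvDB (locs.getD k (0,0)) (locs.getD t (0,0))) locs.length hm1 hr1 ht
  refine ⟨hm2, hr2, fun i j hi hj => ?_⟩
  rw [pvSet2_acc _ t k i j _ locs.length hm1 hr1 ht (by omega) hi,
      pvSet2_acc m k t i j _ locs.length hm hr (by omega) ht hi,
      hacc i j hi hj]
  by_cases h1 : i = t ∧ j = k
  · rw [if_pos h1, if_pos (by omega)]
    rcases h1 with ⟨rfl, rfl⟩
    unfold pvEB
    rw [if_neg (by omega), if_neg (by omega)]
  · rw [if_neg h1]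
    by_cases h2 : i = k ∧ j = t
    · rw [if_pos h2, if_pos (by omega)]
      rcases h2 with ⟨rfl, rfl⟩
      unfold pvEB
      rw [if_neg (by omega), if_pos hkt]
    · rw [if_neg h2]
      by_cases hc : i = j ∨ i < k ∨ j < k ∨ (i = k ∧ j < t) ∨ (j = k ∧ i < t)
      · rw [if_pos hc, if_pos (by omega)]
      · rw [if_neg hc, if_neg (by omega)]

theorem pvB_inner (locs : List (Int × Int)) (k : Nat) (d : Nat) :
    ∀ (t : Nat) (m : List (List Int)), k < t → t + d = locs.length → pvAccB locs k t m →
    pvAccB locs k locs.length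
      ((PySem.List.pyRange (t : Int) (locs.length : Int) 1).foldl (fun m j =>
        let dd := ((pvBfsDistances (PySem.List.pyGetD locs (k : Int) (0, 0))).getD (PySem.List.pyGetD locs j (0, 0)) 9999);
        pvSet2 (pvSet2 m (k : Int) j dd) j (k : Int) dd) m) := by
  induction d with
  | zero =>
      intro t m hkt htn hacc
      have ht : t = locs.length := by omega
      subst ht
      rw [PySem.List.pyRange_one_eq_nil (le_refl _)]
      exact hacc
  | succ d ih =>
      intro t m hkt htn hacc
      have htlt : t < locs.length := by omega
      rw [PySem.List.pyRange_one_cons (by exact_mod_cast htlt), List.foldl_cons]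
      have hstep : (let dd := ((pvBfsDistances (PySem.List.pyGetD locs (k : Int) (0, 0))).getD (PySem.List.pyGetD locs (t : Int) (0, 0)) 9999);
          pvSet2 (pvSet2 m (k : Int) (t : Int) dd) (t : Int) (k : Int) dd) =
          pvSet2 (pvSet2 m (k : Int) (t : Int) (pvDB (locs.getD k (0,0)) (locs.getD t (0,0))))
            (t : Int) (k : Int) (pvDB (locs.getD k (0,0)) (locs.getD t (0,0))) := by
        simp [pvDB]
      rw [hstep]
      have hacc' := pvB_pair locs k t m hkt htlt hacc
      have hrec := ih (t + 1) _ (by omega) (by omega) hacc'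
      have hc : ((t + 1 : Nat) : Int) = (t : Int) + 1 := by push_cast; ring
      rw [hc] at hrec
      exact hrec

theorem pvB_round (locs : List (Int × Int)) (k : Nat) (m : List (List Int))
    (hk : k < locs.length) (h : pvAccB locs k k m) :
    pvAccB locs (k + 1) (k + 1)
      ((PySem.List.pyRange ((k : Int) + 1) (locs.length : Int) 1).foldl (fun m j =>
        let dd := ((pvBfsDistances (PySem.List.pyGetD locs (k : Int) (0, 0))).getD (PySem.List.pyGetD locs j (0, 0)) 9999);
        pvSet2 (pvSet2 m (k : Int) j dd) j (k : Int) dd) m) := by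
  have h1 := pvB_kk locs k m h
  have h2 := pvB_inner locs k (locs.length - (k + 1)) (k + 1) _ (by omega) (by omega) h1
  rw [show ((k + 1 : Nat) : Int) = (k : Int) + 1 by push_cast; ring] at h2
  obtain ⟨hm, hr, hacc⟩ := h2
  refine ⟨hm, hr, fun i j hi hj => ?_⟩
  rw [hacc i j hi hj]
  by_cases hc : i = j ∨ i < k ∨ j < k ∨ (i = k ∧ j < locs.length) ∨ (j = k ∧ i < locs.length)
  · rw [if_pos hc, if_pos (by omega)]
  · rw [if_neg hc, if_neg (by omega)]

theorem pvB_fold (locs : List (Int × Int)) (k : Nat) (hk : k ≤ locs.length) :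
    pvAccB locs k k
      ((List.range k).foldl (fun m (i : Nat) =>
        (PySem.List.pyRange ((i : Int) + 1) (locs.length : Int) 1).foldl (fun m j =>
          let dd := ((pvBfsDistances (PySem.List.pyGetD locs (i : Int) (0, 0))).getD (PySem.List.pyGetD locs j (0, 0)) 9999);
          pvSet2 (pvSet2 m (i : Int) j dd) j (i : Int) dd) m)
        (List.replicate locs.length (List.replicate locs.length (0 : Int)))) := by
  induction k with
  | zero =>
      simp only [List.range_zero, List.foldl_nil]
      refine ⟨by simp, fun r hr => ?_, fun i j hi hj => ?_⟩
      · rw [List.eq_of_mem_replicate hr]; simp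
      · have h0 : (List.replicate locs.length (List.replicate locs.length (0 : Int))).getD i [] =
            List.replicate locs.length (0 : Int) := by
          rw [List.getD_eq_getElem _ _ (by simpa using hi)]
          exact List.getElem_replicate _
        rw [h0, List.getD_eq_getElem _ _ (by simpa using hj), List.getElem_replicate]
        by_cases hc : i = j ∨ i < 0 ∨ j < 0 ∨ (i = 0 ∧ j < 0) ∨ (j = 0 ∧ i < 0)
        · rw [if_pos hc]
          have hij : i = j := by omega
          unfold pvEB
          rw [if_pos hij]
        · rw [if_neg hc]
  | succ k ih =>
      rw [List.range_succ, List.foldl_append, List.foldl_cons, List.foldl_nil]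
      exact pvB_round locs k _ (by omega) (ih (by omega))

theorem pvB_eq_spec (locs : List (Int × Int)) : build_distance_matrix_alt locs = pvSpecMatB locs := by
  have hfold := pvB_fold locs locs.length (le_refl _)
  have hport : build_distance_matrix_alt locs =
      (List.range locs.length).foldl (fun m (i : Nat) =>
        (PySem.List.pyRange ((i : Int) + 1) (locs.length : Int) 1).foldl (fun m j =>
          let dd := ((pvBfsDistances (PySem.List.pyGetD locs (i : Int) (0, 0))).getD (PySem.List.pyGetD locs j (0, 0)) 9999);
          pvSet2 (pvSet2 m (i : Int) j dd) j (i : Int) dd) m)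
        (List.replicate locs.length (List.replicate locs.length (0 : Int))) := by
    have hrange : PySem.List.pyRange 0 (locs.length : Int) 1 =
        (List.range locs.length).map (fun k : Nat => (k : Int)) := by
      rw [PySem.List.pyRange_one]
      simp
    unfold build_distance_matrix_alt
    simp only [PySem.List.len_eq, hrange, List.foldl_map, Int.toNat_natCast]
  rw [hport]
  obtain ⟨hm, hr, hacc⟩ := hfold
  refine List.ext_getElem (by rw [hm]; simp [pvSpecMatB]) (fun i hi1 hi2 => ?_)
  refine List.ext_getElem ?_ (fun j hj1 hj2 => ?_)
  · rw [hr _ (List.getElem_mem _)]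
    simp [pvSpecMatB] at hi2 ⊢
  · have hi : i < locs.length := by rwa [hm] at hi1
    have hj : j < locs.length := by
      have := hr _ (List.getElem_mem hi1)
      omega
    have := hacc i j hi hj
    rw [if_pos (by omega)] at this
    rw [List.getD_eq_getElem _ _ hi1, List.getD_eq_getElem _ _ hj1] at this
    rw [this]
    simp [pvSpecMatB]

-- ===== VERDICT (by name: the statement is the Claim_ definition above) =====
theorem build_distance_matrix_spec : Claim_equal_build_distance_matrix := by
  intro locs _
  unfold Spec_build_distance_matrix
  rw [pvA_eq_spec, pvB_eq_spec]
  unfold pvSpecMat pvSpecMatB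
  simp only [pvE_eq_pvEB]
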